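-- pv_equiv track=rewrite | github.com/Valokoodari/advent-of-code | 2023/solutions/day_17.py | solve
-- ===== SOURCE A (Python) =====
-- from heapq import heappush, heappop
--
-- def solve(d, mn = 1, mx = 3):
--     ms = [[int(n) for n in l] for l in d.splitlines()]
--
--     q, vs, cs = [(0, 0, 0, -1)], set(), {}
--     while q:
--         p, r, c, d = heappop(q)
--         if r == len(ms) - 1 and c == len(ms[0]) - 1:
--             return p
--         if (r, c, d) in vs:
--             continue
--         vs.add((r, c, d))
--
--         for nd in range(4):
--             if nd == d or (nd + 2) % 4 == d:
--                 continue
--             (dr, dc), h = ((-1, 0), (0, 1), (1, 0), (0, -1))[nd], 0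
--             for i in range(1, mx+1):
--                 nr, nc = r + dr * i, c + dc * i
--                 if 0 <= nr < len(ms) and 0 <= nc < len(ms[0]):
--                     h += ms[nr][nc]
--                     if i >= mn:
--                         if (nr, nc, nd) in cs and cs[(nr, nc, nd)] <= p + h:
--                             continue
--                         cs[(nr, nc, nd)] = p + h
--                         heappush(q, (p + h, nr, nc, nd))
-- ===== SOURCE B (Python) =====
-- def solve(d, mn = 1, mx = 3):
--     # Bellman-Ford style fixed-round relaxation over (row, col, last-direction)
--     # states of the jump graph, instead of A's best-first heap search.
--     grid = [[int(ch) for ch in line] for line in d.splitlines()]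
--     rows = len(grid)
--     cols = len(grid[0]) if grid else 0
--     if rows == 1 and cols == 1:
--         return 0
--     dirs = ((-1, 0), (0, 1), (1, 0), (0, -1))
--     dist = {(0, 0, -1): 0}
--     for _ in range(4 * rows * cols + 1):
--         for (r, c, dd), base in list(dist.items()):
--             for nd in range(4):
--                 if nd == dd or (nd + 2) % 4 == dd:
--                     continue
--                 dr, dc = dirs[nd]
--                 h = 0
--                 for i in range(1, mx + 1):
--                     nr, nc = r + dr * i, c + dc * i
--                     if not (0 <= nr < rows and 0 <= nc < cols):
--                         break
--                     h += grid[nr][nc]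
--                     if i >= mn:
--                         k = (nr, nc, nd)
--                         if k not in dist or base + h < dist[k]:
--                             dist[k] = base + h
--     best = [dist[(rows - 1, cols - 1, nd)] for nd in range(4)
--             if (rows - 1, cols - 1, nd) in dist]
--     return min(best) if best else None
-- ===== Notes on version B (the rewrite author's own statement) =====
-- stated objective: alternative
-- what changed: Replaces A's best-first Dijkstra search (binary heap of frontier states, visited set, early return on the first goal pop) with fixed-round Bellman-Ford value iteration: a dict of tentative costs per (row, col, last-direction) state is relaxed over every jump edge for 4*rows*cols+1 rounds, then the goal cost is read off the table.
-- outside the precondition, e.g. on solve('12\n1', 1, 0): A returns None, B returns None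
import Mathlib
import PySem

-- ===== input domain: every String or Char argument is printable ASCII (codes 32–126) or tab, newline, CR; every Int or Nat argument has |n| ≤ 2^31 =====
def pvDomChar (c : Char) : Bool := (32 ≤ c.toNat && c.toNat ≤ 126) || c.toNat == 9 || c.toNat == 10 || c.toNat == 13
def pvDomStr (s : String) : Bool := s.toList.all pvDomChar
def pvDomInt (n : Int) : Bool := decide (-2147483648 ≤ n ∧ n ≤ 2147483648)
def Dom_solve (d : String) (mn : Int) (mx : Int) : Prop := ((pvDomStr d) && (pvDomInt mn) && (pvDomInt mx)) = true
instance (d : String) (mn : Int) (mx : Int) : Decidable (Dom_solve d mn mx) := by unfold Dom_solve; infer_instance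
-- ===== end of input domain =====

-- B replaces A's best-first Dijkstra (binary heap, visited set, early exit on the first goal pop)
-- by fixed-round Bellman-Ford value iteration: a dict of tentative costs per
-- (row, col, last-direction) state is relaxed over all jump edges for 4*rows*cols+1 rounds and
-- the goal's cost is read off at the end; alternative algorithm, not claimed faster.

-- shared helpers: both Pythons parse the grid the same way and read cells grid[r][c] the same way
def pvParse (d : String) : List (List Int) :=
  (PySem.Str.splitlines d).map (fun l => l.toList.map (fun ch => (PySem.Int.ofStr? (String.ofList [ch])).getD 0))

def pvCell (g : List (List Int)) (r c : Int) : Int :=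
  PySem.List.pyGetD (PySem.List.pyGetD g r []) c 0

def pvDirs : List (Int × Int) := [(-1, 0), (0, 1), (1, 0), (0, -1)]

-- ===== PORT A =====
-- Python's `<=` on 4-tuples of ints (lexicographic); heapq modelled as a bag:
-- heappush appends, heappop extracts the minimum tuple
def pvTupLe (a b : Int × Int × Int × Int) : Bool :=
  decide (a.1 < b.1 ∨ (a.1 = b.1 ∧ (a.2.1 < b.2.1 ∨ (a.2.1 = b.2.1 ∧
    (a.2.2.1 < b.2.2.1 ∨ (a.2.2.1 = b.2.2.1 ∧ a.2.2.2 ≤ b.2.2.2))))))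

def pvMinOf (x : Int × Int × Int × Int) (t : List (Int × Int × Int × Int)) : Int × Int × Int × Int :=
  t.foldl (fun m y => if pvTupLe y m then y else m) x

def pvHeapPop (q : List (Int × Int × Int × Int)) :
    Option ((Int × Int × Int × Int) × List (Int × Int × Int × Int)) :=
  match q with
  | [] => none
  | x :: t => let m := pvMinOf x t; some (m, (x :: t).erase m)

-- the body of A's inner `for i in range(1, mx+1)` loop, one direction nd = (dr, dc)
def pvBodyA (ms : List (List Int)) (p r c nd mn dr dc : Int)
    (st : Int × PySem.Dict (Int × Int × Int) Int × List (Int × Int × Int × Int)) (i : Int) :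
    Int × PySem.Dict (Int × Int × Int) Int × List (Int × Int × Int × Int) :=
  let (h, cs, q) := st
  let nr := r + dr * i
  let nc := c + dc * i
  if 0 ≤ nr ∧ nr < (ms.length : Int) ∧ 0 ≤ nc ∧ nc < ((ms.headD []).length : Int) then
    let h := h + pvCell ms nr nc
    if mn ≤ i then
      if cs.contains (nr, nc, nd) ∧ cs.getD (nr, nc, nd) 0 ≤ p + h then (h, cs, q)
      else (h, cs.insert (nr, nc, nd) (p + h), q ++ [(p + h, nr, nc, nd)])
    else (h, cs, q)
  else (h, cs, q)

def pvScanA (ms : List (List Int)) (p r c nd mn mx dr dc : Int)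
    (cs : PySem.Dict (Int × Int × Int) Int) (q : List (Int × Int × Int × Int)) :
    PySem.Dict (Int × Int × Int) Int × List (Int × Int × Int × Int) :=
  let res := (PySem.List.pyRange 1 (mx + 1) 1).foldl (pvBodyA ms p r c nd mn dr dc) (0, cs, q)
  (res.2.1, res.2.2)

-- one direction step of A's `for nd in range(4)`
def pvDirA (ms : List (List Int)) (p r c dd mn mx : Int)
    (st : PySem.Dict (Int × Int × Int) Int × List (Int × Int × Int × Int)) (nd : Int) :
    PySem.Dict (Int × Int × Int) Int × List (Int × Int × Int × Int) :=
  if nd = dd ∨ PySem.Int.mod (nd + 2) 4 = dd then st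
  else
    let dp := PySem.List.pyGetD pvDirs nd (0, 0)
    pvScanA ms p r c nd mn mx dp.1 dp.2 st.1 st.2

def pvExpandA (ms : List (List Int)) (p r c dd mn mx : Int)
    (cs : PySem.Dict (Int × Int × Int) Int) (q : List (Int × Int × Int × Int)) :
    PySem.Dict (Int × Int × Int) Int × List (Int × Int × Int × Int) :=
  (PySem.List.pyRange 0 4 1).foldl (pvDirA ms p r c dd mn mx) (cs, q)

-- fuel: an upper bound on the number of loop iterations (proved sufficient below);
-- the Python while-loop stops by returning or emptying the queue long before it runs out
def pvFuel (ms : List (List Int)) (mx : Int) : Nat :=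
  1 + (2 + 4 * (ms.length * (ms.headD []).length)) * (4 * mx.toNat + 2)

def pvLoopA (ms : List (List Int)) (mn mx : Int) :
    Nat → List (Int × Int × Int × Int) → PySem.Set (Int × Int × Int) →
    PySem.Dict (Int × Int × Int) Int → Option Int
  | 0, _, _, _ => none
  | Nat.succ f, q, vs, cs =>
    match pvHeapPop q with
    | none => none
    | some ((p, r, c, dd), q') =>
      if r = (ms.length : Int) - 1 ∧ c = ((ms.headD []).length : Int) - 1 then some p
      else if (r, c, dd) ∈ vs then pvLoopA ms mn mx f q' vs cs
      else
        let vs' := PySem.Set.add vs (r, c, dd)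
        let st := pvExpandA ms p r c dd mn mx cs q'
        pvLoopA ms mn mx f st.2 vs' st.1

def solve (d : String) (mn : Int) (mx : Int) : Option Int :=
  let ms := pvParse d
  pvLoopA ms mn mx (pvFuel ms mx) [(0, 0, 0, -1)] [] PySem.Dict.empty

-- ===== PORT B =====
-- B's inner `for i in range(1, mx+1)` walk with `break`, as a fold carrying a stopped flag
def pvStepB (grid : List (List Int)) (rows cols mn : Int) (r c base : Int) (nd dr dc : Int)
    (st : Bool × Int × PySem.Dict (Int × Int × Int) Int) (i : Int) :
    Bool × Int × PySem.Dict (Int × Int × Int) Int :=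
  if st.1 then st
  else
    let nr := r + dr * i
    let nc := c + dc * i
    if 0 ≤ nr ∧ nr < rows ∧ 0 ≤ nc ∧ nc < cols then
      let h := st.2.1 + pvCell grid nr nc
      let dist := st.2.2
      if mn ≤ i then
        if ¬ dist.contains (nr, nc, nd) ∨ base + h < dist.getD (nr, nc, nd) 0 then
          (false, h, dist.insert (nr, nc, nd) (base + h))
        else (false, h, dist)
      else (false, h, dist)
    else (true, st.2.1, st.2.2)

-- relaxing all jump edges out of one dict item ((r, c, dd), base): the `for nd in range(4)`
def pvItemB (grid : List (List Int)) (rows cols mn mx : Int)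
    (dist : PySem.Dict (Int × Int × Int) Int) (item : (Int × Int × Int) × Int) :
    PySem.Dict (Int × Int × Int) Int :=
  (PySem.List.pyRange 0 4 1).foldl (fun dist nd =>
    if nd = item.1.2.2 ∨ PySem.Int.mod (nd + 2) 4 = item.1.2.2 then dist
    else
      let v := PySem.List.pyGetD pvDirs nd (0, 0)
      ((PySem.List.pyRange 1 (mx + 1) 1).foldl
        (pvStepB grid rows cols mn item.1.1 item.1.2.1 item.2 nd v.1 v.2)
        (false, 0, dist)).2.2) dist

-- one Bellman-Ford round: relax out of every item of the round-start snapshot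
def pvRoundB (grid : List (List Int)) (rows cols mn mx : Int)
    (dist : PySem.Dict (Int × Int × Int) Int) : PySem.Dict (Int × Int × Int) Int :=
  dist.items.foldl (pvItemB grid rows cols mn mx) dist

def solve_alt (d : String) (mn : Int) (mx : Int) : Option Int :=
  let grid := pvParse d
  let rows : Int := grid.length
  let cols : Int := if grid = [] then 0 else ((grid.headD []).length : Int)
  if rows = 1 ∧ cols = 1 then some 0
  else
    let dist := (PySem.List.pyRange 0 (4 * rows * cols + 1) 1).foldl
      (fun dist _ => pvRoundB grid rows cols mn mx dist)
      (PySem.Dict.ofList [(((0 : Int), (0 : Int), (-1 : Int)), (0 : Int))])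
    let best := (PySem.List.pyRange 0 4 1).foldl
      (fun acc nd => if dist.contains (rows - 1, cols - 1, nd) then
          acc ++ [dist.getD (rows - 1, cols - 1, nd) 0] else acc) []
    PySem.List.min? best (fun x => x)

-- ===== PRECONDITION & SPEC =====
-- Pre_ excludes grids with a non-digit character (int(ch) raises ValueError in A) and grids
-- having some line shorter than the first line, on which A's ms[nr][nc] access can raise IndexError.
def Pre_solve (d : String) (mn : Int) (mx : Int) : Prop :=
  ((PySem.Chars.splitlines d.toList).all (fun l =>
    l.all PySem.Chars.isdigit &&
    decide (((PySem.Chars.splitlines d.toList).headD []).length ≤ l.length))) = true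

instance (d : String) (mn : Int) (mx : Int) : Decidable (Pre_solve d mn mx) := by
  unfold Pre_solve; infer_instance

def pvWitness_solve : String × Int × Int := ("241\n321\n325", 1, 3)

def Spec_solve (d : String) (mn : Int) (mx : Int) (out : Option Int) : Prop := out = solve_alt d mn mx
instance (d : String) (mn : Int) (mx : Int) (out : Option Int) : Decidable (Spec_solve d mn mx out) := by unfold Spec_solve; infer_instance

-- ===== CLAIM (what is proved, stated in full; the proofs are below) =====
def Claim_equal_solve : Prop := ∀ (d : String) (mn : Int) (mx : Int), Dom_solve d mn mx → Pre_solve d mn mx → Spec_solve d mn mx (solve d mn mx)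

-- ===== LEMMAS AND PROOFS =====

-- ===== graph-theoretic description of the jump graph (proof-side only) =====

def pvES (e : Int × Int × Int × Int) : Int × Int × Int := (e.2.1, e.2.2.1, e.2.2.2)

def pvInB (g : List (List Int)) (r c : Int) : Prop :=
  0 ≤ r ∧ r < (g.length : Int) ∧ 0 ≤ c ∧ c < ((g.headD []).length : Int)

def pvDR (nd : Int) : Int := (PySem.List.pyGetD pvDirs nd (0, 0)).1
def pvDC (nd : Int) : Int := (PySem.List.pyGetD pvDirs nd (0, 0)).2

def pvWsum (g : List (List Int)) (r c dr dc : Int) : Nat → Int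
  | 0 => 0
  | Nat.succ k => pvWsum g r c dr dc k + pvCell g (r + dr * ((k : Int) + 1)) (c + dc * ((k : Int) + 1))

def pvAllowed (dd nd : Int) : Prop :=
  (nd = 0 ∨ nd = 1 ∨ nd = 2 ∨ nd = 3) ∧ ¬(nd = dd ∨ PySem.Int.mod (nd + 2) 4 = dd)

def pvEdgeD (g : List (List Int)) (mn mx : Int) (r c nd i : Int) : Prop :=
  1 ≤ i ∧ mn ≤ i ∧ i ≤ mx ∧
    ∀ k : Int, 1 ≤ k → k ≤ i → pvInB g (r + pvDR nd * k) (c + pvDC nd * k)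

def pvTgt (r c nd i : Int) : Int × Int × Int := (r + pvDR nd * i, c + pvDC nd * i, nd)

def pvEdge (g : List (List Int)) (mn mx : Int) (s t : Int × Int × Int) (w : Int) : Prop :=
  ∃ nd i, pvAllowed s.2.2 nd ∧ pvEdgeD g mn mx s.1 s.2.1 nd i ∧
    t = pvTgt s.1 s.2.1 nd i ∧ w = pvWsum g s.1 s.2.1 (pvDR nd) (pvDC nd) i.toNat

inductive pvWalk (g : List (List Int)) (mn mx : Int) :
    (Int × Int × Int) → List (Int × Int × Int) → (Int × Int × Int) → Int → Prop
  | nil (s : Int × Int × Int) : pvWalk g mn mx s [] s 0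
  | cons {s t u : Int × Int × Int} {w c : Int} {l : List (Int × Int × Int)} :
      pvEdge g mn mx s t w → pvWalk g mn mx t l u c → pvWalk g mn mx s (t :: l) u (w + c)

def pvReach (g : List (List Int)) (mn mx : Int) (t : Int × Int × Int) (c : Int) : Prop :=
  ∃ l, pvWalk g mn mx (0, 0, -1) l t c

def pvGoal (g : List (List Int)) (s : Int × Int × Int) : Prop :=
  s.1 = (g.length : Int) - 1 ∧ s.2.1 = ((g.headD []).length : Int) - 1

def pvGoalCosts (g : List (List Int)) (mn mx : Int) : Set ℕ :=
  {n | ∃ t, pvGoal g t ∧ pvReach g mn mx t (n : Int)}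

noncomputable def pvOpt (g : List (List Int)) (mn mx : Int) : ℕ := sInf (pvGoalCosts g mn mx)

-- direction table values
theorem pvDR_0 : pvDR 0 = -1 := rfl
theorem pvDR_1 : pvDR 1 = 0 := rfl
theorem pvDR_2 : pvDR 2 = 1 := rfl
theorem pvDR_3 : pvDR 3 = 0 := rfl
theorem pvDC_0 : pvDC 0 = 0 := rfl
theorem pvDC_1 : pvDC 1 = 1 := rfl
theorem pvDC_2 : pvDC 2 = 0 := rfl
theorem pvDC_3 : pvDC 3 = -1 := rfl

-- digits parse to nonnegative cells
theorem pvDigitNonneg (c : Char) (h : PySem.Chars.isdigit c = true) :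
    0 ≤ (PySem.Int.ofStr? (String.ofList [c])).getD 0 := by
  simp only [PySem.Chars.isdigit, Bool.and_eq_true, decide_eq_true_eq, Char.le_def,
    UInt32.le_iff_toNat_le] at h
  obtain ⟨h1, h2⟩ := h
  have e0 : ('0').val.toNat = 48 := rfl
  have e9 : ('9').val.toNat = 57 := rfl
  rw [e0] at h1; rw [e9] at h2
  have hc : c = Char.ofNat c.toNat := (Char.ofNat_toNat c).symm
  have hb : c.val.toNat = c.toNat := rfl
  rw [hb] at h1 h2
  have : c.toNat = 48 ∨ c.toNat = 49 ∨ c.toNat = 50 ∨ c.toNat = 51 ∨ c.toNat = 52 ∨ c.toNat = 53 ∨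
      c.toNat = 54 ∨ c.toNat = 55 ∨ c.toNat = 56 ∨ c.toNat = 57 := by omega
  rcases this with h|h|h|h|h|h|h|h|h|h <;> rw [h] at hc <;> subst hc <;> decide

theorem pvGetDNonneg (xs : List Int) (i d : Int) (hxs : ∀ x ∈ xs, 0 ≤ x) (hd : 0 ≤ d) :
    0 ≤ PySem.List.pyGetD xs i d := by
  unfold PySem.List.pyGetD
  rcases h : PySem.List.pyGet? xs i with _ | v
  · simpa using hd
  · simpa using hxs v (PySem.List.mem_of_pyGet?_eq_some xs h)

theorem pvCellNonneg (d : String) (mn mx : Int) (hpre : Pre_solve d mn mx) (r c : Int) :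
    0 ≤ pvCell (pvParse d) r c := by
  unfold pvCell
  apply pvGetDNonneg _ _ _ _ le_rfl
  intro x hx
  unfold PySem.List.pyGetD at hx
  rcases h : PySem.List.pyGet? (pvParse d) r with _ | row
  · rw [h] at hx; simp at hx
  · rw [h] at hx; simp at hx
    have hmem : row ∈ pvParse d := PySem.List.mem_of_pyGet?_eq_some _ h
    unfold pvParse at hmem
    rcases List.mem_map.mp hmem with ⟨line, hline, rfl⟩
    rcases List.mem_map.mp hx with ⟨ch, hch, rfl⟩
    apply pvDigitNonneg
    unfold Pre_solve at hpre
    rw [List.all_eq_true] at hpre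
    have hl : line.toList ∈ PySem.Chars.splitlines d.toList := by
      rw [← PySem.Str.splitlines_map_toList]
      exact List.mem_map_of_mem hline
    have := hpre _ hl
    rw [Bool.and_eq_true, List.all_eq_true] at this
    exact this.1 _ hch

-- ===== walk lemmas =====

theorem pvWsumNonneg (g : List (List Int)) (hg : ∀ r c, 0 ≤ pvCell g r c)
    (r c dr dc : Int) (k : Nat) : 0 ≤ pvWsum g r c dr dc k := by
  induction k with
  | zero => simp [pvWsum]
  | succ k ih => simpa [pvWsum] using add_nonneg ih (hg _ _)

theorem pvEdgeNonneg (g : List (List Int)) (mn mx : Int) (hg : ∀ r c, 0 ≤ pvCell g r c)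
    {s t : Int × Int × Int} {w : Int} (h : pvEdge g mn mx s t w) : 0 ≤ w := by
  obtain ⟨nd, i, _, _, _, rfl⟩ := h
  exact pvWsumNonneg g hg _ _ _ _ _

theorem pvWalkNonneg (g : List (List Int)) (mn mx : Int) (hg : ∀ r c, 0 ≤ pvCell g r c)
    {s u : Int × Int × Int} {l : List (Int × Int × Int)} {c : Int}
    (h : pvWalk g mn mx s l u c) : 0 ≤ c := by
  induction h with
  | nil => exact le_rfl
  | cons he _ ih => exact add_nonneg (pvEdgeNonneg g mn mx hg he) ih

theorem pvWalkAppend (g : List (List Int)) (mn mx : Int)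
    {s m u : Int × Int × Int} {l1 l2 : List (Int × Int × Int)} {c1 c2 : Int}
    (h1 : pvWalk g mn mx s l1 m c1) (h2 : pvWalk g mn mx m l2 u c2) :
    pvWalk g mn mx s (l1 ++ l2) u (c1 + c2) := by
  induction h1 with
  | nil => simpa using h2
  | cons he _ ih =>
    rw [List.cons_append, add_assoc]
    exact pvWalk.cons he (ih h2)

theorem pvWalkSplit (g : List (List Int)) (mn mx : Int)
    {s u : Int × Int × Int} {l1 l2 : List (Int × Int × Int)} {c : Int}
    (h : pvWalk g mn mx s (l1 ++ l2) u c) :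
    ∃ m c1 c2, pvWalk g mn mx s l1 m c1 ∧ pvWalk g mn mx m l2 u c2 ∧ c = c1 + c2 := by
  induction l1 generalizing s c with
  | nil => exact ⟨s, 0, c, pvWalk.nil s, by simpa using h, by ring⟩
  | cons x l1 ih =>
    rw [List.cons_append] at h
    cases h with
    | cons he hw =>
      obtain ⟨m, c1, c2, hw1, hw2, rfl⟩ := ih hw
      exact ⟨m, _ + c1, c2, pvWalk.cons he hw1, hw2, by ring⟩

theorem pvWalkSingleton (g : List (List Int)) (mn mx : Int)
    {s u x : Int × Int × Int} {c : Int} (h : pvWalk g mn mx s [x] u c) :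
    u = x ∧ pvEdge g mn mx s x c := by
  cases h with
  | cons he hw => cases hw with | nil => exact ⟨rfl, by simpa using he⟩

theorem pvWalkSnoc (g : List (List Int)) (mn mx : Int)
    {s u x : Int × Int × Int} {l : List (Int × Int × Int)} {c : Int}
    (h : pvWalk g mn mx s (l ++ [x]) u c) :
    u = x ∧ ∃ m c1 w, pvWalk g mn mx s l m c1 ∧ pvEdge g mn mx m x w ∧ c = c1 + w := by
  obtain ⟨m, c1, c2, hw1, hw2, rfl⟩ := pvWalkSplit g mn mx h
  obtain ⟨rfl, he⟩ := pvWalkSingleton g mn mx hw2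
  exact ⟨rfl, m, c1, c2, hw1, he, rfl⟩

theorem pvWalkLast (g : List (List Int)) (mn mx : Int)
    {s u x : Int × Int × Int} {l : List (Int × Int × Int)} {c : Int}
    (h : pvWalk g mn mx s (l ++ [x]) u c) : u = x :=
  (pvWalkSnoc g mn mx h).1

theorem pvReachNil (g : List (List Int)) (mn mx : Int) : pvReach g mn mx (0, 0, -1) 0 :=
  ⟨[], pvWalk.nil _⟩

theorem pvReachStep (g : List (List Int)) (mn mx : Int)
    {s t : Int × Int × Int} {c w : Int}
    (h : pvReach g mn mx s c) (he : pvEdge g mn mx s t w) : pvReach g mn mx t (c + w) := by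
  obtain ⟨l, hw⟩ := h
  exact ⟨l ++ [t], pvWalkAppend g mn mx hw (by simpa using pvWalk.cons he (pvWalk.nil t))⟩

theorem pvWalkMemState (g : List (List Int)) (mn mx : Int)
    {s u : Int × Int × Int} {l : List (Int × Int × Int)} {c : Int}
    (h : pvWalk g mn mx s l u c) :
    ∀ x ∈ l, (x.2.2 = 0 ∨ x.2.2 = 1 ∨ x.2.2 = 2 ∨ x.2.2 = 3) ∧ pvInB g x.1 x.2.1 := by
  induction h with
  | nil => simp
  | cons he hw ih =>
    intro x hx
    rcases List.mem_cons.mp hx with rfl | hx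
    · obtain ⟨nd, i, ⟨hnd, _⟩, hD, rfl, _⟩ := he
      exact ⟨by simpa [pvTgt] using hnd, by simpa [pvTgt] using hD.2.2.2 i hD.1 le_rfl⟩
    · exact ih x hx

theorem pvWalkEnd (g : List (List Int)) (mn mx : Int)
    {s u : Int × Int × Int} {l : List (Int × Int × Int)} {c : Int}
    (h : pvWalk g mn mx s l u c) : u = s ∨ u ∈ l := by
  induction h with
  | nil => exact Or.inl rfl
  | cons _ _ ih =>
    rcases ih with rfl | h
    · exact Or.inr (List.mem_cons_self)
    · exact Or.inr (List.mem_cons_of_mem _ h)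

theorem pvReachState (g : List (List Int)) (mn mx : Int)
    {t : Int × Int × Int} {c : Int} (h : pvReach g mn mx t c) :
    t = (0, 0, -1) ∨ ((t.2.2 = 0 ∨ t.2.2 = 1 ∨ t.2.2 = 2 ∨ t.2.2 = 3) ∧ pvInB g t.1 t.2.1) := by
  obtain ⟨l, hw⟩ := h
  rcases pvWalkEnd g mn mx hw with rfl | hm
  · exact Or.inl rfl
  · exact Or.inr (pvWalkMemState g mn mx hw t hm)

-- ===== the finite state space and the pigeonhole bound =====

def pvSpace (g : List (List Int)) : Finset (Int × Int × Int) :=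
  insert ((0 : Int), (0 : Int), (-1 : Int))
    (((Finset.range g.length) ×ˢ (Finset.range (g.headD []).length) ×ˢ (Finset.range 4)).image
      (fun p => ((p.1 : Int), (p.2.1 : Int), (p.2.2 : Int))))

theorem pvSpaceCard (g : List (List Int)) :
    (pvSpace g).card ≤ 1 + 4 * (g.length * (g.headD []).length) := by
  refine le_trans (Finset.card_insert_le _ _) ?_
  have h1 := Finset.card_image_le (s := (Finset.range g.length) ×ˢ (Finset.range (g.headD []).length) ×ˢ (Finset.range 4))
    (f := fun p => ((p.1 : Int), (p.2.1 : Int), (p.2.2 : Int)))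
  simp only [Finset.card_product, Finset.card_range] at h1
  have h2 : g.length * ((g.headD []).length * 4) = 4 * (g.length * (g.headD []).length) := by ring
  omega

theorem pvMemSpace (g : List (List Int)) (mn mx : Int)
    {t : Int × Int × Int} {c : Int} (h : pvReach g mn mx t c) : t ∈ pvSpace g := by
  rcases pvReachState g mn mx h with rfl | ⟨hd, hb⟩
  · exact Finset.mem_insert_self _ _
  · obtain ⟨r, c', d⟩ := t
    simp only [pvInB] at hb
    apply Finset.mem_insert_of_mem
    apply Finset.mem_image.mpr
    refine ⟨(r.toNat, c'.toNat, d.toNat), ?_, ?_⟩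
    · simp only [Finset.mem_product, Finset.mem_range]
      refine ⟨by omega, by omega, by simp at hd; omega⟩
    · simp at hd ⊢
      refine ⟨by omega, by omega, by omega⟩

theorem pvNodupLen (g : List (List Int)) (l : List (Int × Int × Int)) (hnd : l.Nodup)
    (hsub : ∀ x ∈ l, x ∈ pvSpace g) : l.length ≤ (pvSpace g).card := by
  have h1 : l.toFinset.card = l.length := List.toFinset_card_of_nodup hnd
  rw [← h1]
  exact Finset.card_le_card (fun x hx => hsub x (List.mem_toFinset.mp hx))

-- decomposing a list around a duplicated element
theorem pvPairSublist {α : Type} {x : α} {m : List α} (h : List.Sublist [x, x] m) :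
    ∃ A B C, m = A ++ x :: B ++ x :: C := by
  induction m with
  | nil => cases h
  | cons y m ih =>
    cases h with
    | cons _ h' =>
      obtain ⟨A, B, C, rfl⟩ := ih h'
      exact ⟨y :: A, B, C, rfl⟩
    | cons₂ h' =>
      rename_i h2
      obtain ⟨B, C, hBC⟩ := List.append_of_mem (List.singleton_sublist.mp h2)
      exact ⟨[], B, C, by simp [hBC]⟩

-- every walk can be shortened to one visiting pairwise-distinct states, at no extra cost
theorem pvWalkCut (g : List (List Int)) (mn mx : Int) (hg : ∀ r c, 0 ≤ pvCell g r c)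
    {t : Int × Int × Int} {l : List (Int × Int × Int)} {c : Int}
    (h : pvWalk g mn mx (0, 0, -1) l t c) :
    ∃ l' c', pvWalk g mn mx (0, 0, -1) l' t c' ∧ c' ≤ c ∧ ((0, 0, -1) :: l').Nodup := by
  have main : ∀ n (l : List (Int × Int × Int)) (c : Int), l.length ≤ n →
      pvWalk g mn mx (0, 0, -1) l t c →
      ∃ l' c', pvWalk g mn mx (0, 0, -1) l' t c' ∧ c' ≤ c ∧ ((0, 0, -1) :: l').Nodup := by
    intro n
    induction n with
    | zero =>
      intro l c hl h
      have hnil : l = [] := List.eq_nil_of_length_eq_zero (by omega)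
      subst hnil
      exact ⟨[], c, h, le_rfl, by simp⟩
    | succ n ih =>
      intro l c hl h
      by_cases hnd : ((0, 0, -1) :: l).Nodup
      · exact ⟨l, c, h, le_rfl, hnd⟩
      · obtain ⟨x, hdup⟩ := List.exists_duplicate_iff_not_nodup.mpr hnd
        obtain ⟨A, B, C, hdec⟩ := pvPairSublist (List.duplicate_iff_sublist.mp hdup)
        cases A with
        | nil =>
          simp only [List.nil_append] at hdec
          obtain ⟨hx, hl2⟩ := List.cons.inj hdec
          have h2 : pvWalk g mn mx (0, 0, -1) ((B ++ [x]) ++ C) t c := by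
            rw [hl2] at h; simpa using h
          obtain ⟨m, c1, c2, hw1, hw2, rfl⟩ := pvWalkSplit g mn mx h2
          have hm : m = x := pvWalkLast g mn mx hw1
          subst hm
          rw [← hx] at hw2
          obtain ⟨l', c', hw, hle, hnd'⟩ := ih C c2 (by rw [hl2] at hl; simp at hl ⊢; omega) hw2
          exact ⟨l', c', hw, le_trans hle (by
            have := pvWalkNonneg g mn mx hg hw1; omega), hnd'⟩
        | cons a A =>
          obtain ⟨ha, hl2⟩ := List.cons.inj hdec
          have h2 : pvWalk g mn mx (0, 0, -1) ((A ++ [x]) ++ ((B ++ [x]) ++ C)) t c := by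
            rw [hl2] at h; simpa using h
          obtain ⟨m1, c1, c23, hw1, hw23, rfl⟩ := pvWalkSplit g mn mx h2
          have hm1 : m1 = x := pvWalkLast g mn mx hw1
          rw [hm1] at hw1 hw23
          obtain ⟨m2, c2, c3, hw2, hw3, rfl⟩ := pvWalkSplit g mn mx hw23
          have hm2 : m2 = x := pvWalkLast g mn mx hw2
          rw [hm2] at hw3
          have hnew := pvWalkAppend g mn mx hw1 hw3
          obtain ⟨l', c', hw, hle, hnd'⟩ := ih ((A ++ [x]) ++ C) (c1 + c3)
            (by rw [hl2] at hl; simp at hl ⊢; omega) hnew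
          exact ⟨l', c', hw, le_trans hle (by
            have := pvWalkNonneg g mn mx hg hw2; omega), hnd'⟩
  exact main l.length l c le_rfl h


-- ===== heap-order lemmas =====

theorem pvTupLe_refl (a : Int × Int × Int × Int) : pvTupLe a a = true := by
  simp [pvTupLe]

theorem pvTupLe_total (a b : Int × Int × Int × Int) :
    pvTupLe a b = true ∨ pvTupLe b a = true := by
  obtain ⟨a1, a2, a3, a4⟩ := a; obtain ⟨b1, b2, b3, b4⟩ := b
  simp only [pvTupLe, decide_eq_true_eq]; omega

theorem pvTupLe_trans {a b c : Int × Int × Int × Int}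
    (h1 : pvTupLe a b = true) (h2 : pvTupLe b c = true) : pvTupLe a c = true := by
  obtain ⟨a1, a2, a3, a4⟩ := a; obtain ⟨b1, b2, b3, b4⟩ := b; obtain ⟨c1, c2, c3, c4⟩ := c
  simp only [pvTupLe, decide_eq_true_eq] at h1 h2 ⊢; omega

theorem pvTupLe_fst {a b : Int × Int × Int × Int} (h : pvTupLe a b = true) : a.1 ≤ b.1 := by
  obtain ⟨a1, a2, a3, a4⟩ := a; obtain ⟨b1, b2, b3, b4⟩ := b
  simp only [pvTupLe, decide_eq_true_eq] at h
  rcases h with h | ⟨h, _⟩ <;> omega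

theorem pvMinOf_mem (x : Int × Int × Int × Int) (t : List (Int × Int × Int × Int)) :
    pvMinOf x t ∈ x :: t := by
  induction t generalizing x with
  | nil => simp [pvMinOf]
  | cons z t ih =>
    have hstep : pvMinOf x (z :: t) = pvMinOf (if pvTupLe z x then z else x) t := by
      simp [pvMinOf]
    rw [hstep]
    rcases List.mem_cons.mp (ih (if pvTupLe z x then z else x)) with h | h
    · rw [h]; split_ifs <;> simp
    · simp [h]

theorem pvMinOf_le (x : Int × Int × Int × Int) (t : List (Int × Int × Int × Int)) :
    ∀ y ∈ x :: t, pvTupLe (pvMinOf x t) y = true := by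
  induction t generalizing x with
  | nil => intro y hy; simp at hy; subst hy; simp [pvMinOf, pvTupLe_refl]
  | cons z t ih =>
    intro y hy
    have hstep : pvMinOf x (z :: t) = pvMinOf (if pvTupLe z x then z else x) t := by
      simp [pvMinOf]
    have hm' : pvTupLe (if pvTupLe z x then z else x) x = true ∧
        pvTupLe (if pvTupLe z x then z else x) z = true := by
      by_cases hz : pvTupLe z x = true
      · simp [hz, pvTupLe_refl]
      · rcases pvTupLe_total z x with h | h
        · exact absurd h hz
        · simp [hz, pvTupLe_refl, h]
    have hmin := ih (if pvTupLe z x then z else x)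
    have hle : pvTupLe (pvMinOf x (z :: t)) (if pvTupLe z x then z else x) = true := by
      rw [hstep]; exact hmin _ (by simp)
    rcases List.mem_cons.mp hy with rfl | hy'
    · exact pvTupLe_trans hle hm'.1
    · rcases List.mem_cons.mp hy' with rfl | hy''
      · exact pvTupLe_trans hle hm'.2
      · rw [hstep]; exact hmin _ (by simp [hy''])

-- ===== A-side: the expansion relaxes exactly the jump edges =====

theorem pvAbsorb (g : List (List Int)) (nd : Int)
    (hnd : nd = 0 ∨ nd = 1 ∨ nd = 2 ∨ nd = 3) (r c : Int) (hsrc : pvInB g r c)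
    {k k' : Int} (h1 : 1 ≤ k) (hkk : k ≤ k')
    (hOOB : ¬ pvInB g (r + pvDR nd * k) (c + pvDC nd * k)) :
    ¬ pvInB g (r + pvDR nd * k') (c + pvDC nd * k') := by
  rcases hnd with rfl | rfl | rfl | rfl <;>
    simp only [pvDR_0, pvDR_1, pvDR_2, pvDR_3, pvDC_0, pvDC_1, pvDC_2, pvDC_3] at hOOB ⊢ <;>
    unfold pvInB at hsrc hOOB ⊢ <;> omega

theorem pvWsum_step (g : List (List Int)) (r c dr dc a : Int) (ha : 0 ≤ a) :
    pvWsum g r c dr dc (a + 1).toNat =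
      pvWsum g r c dr dc a.toNat + pvCell g (r + dr * (a + 1)) (c + dc * (a + 1)) := by
  have h1 : (a + 1).toNat = a.toNat + 1 := by omega
  rw [h1]
  show pvWsum g r c dr dc a.toNat + _ = _
  have h2 : ((a.toNat : Int) + 1) = a + 1 := by omega
  rw [h2]

theorem pvScanAAux (g : List (List Int)) (mn mx p r c nd : Int)
    (hnd : nd = 0 ∨ nd = 1 ∨ nd = 2 ∨ nd = 3)
    (hsrc : pvInB g r c ∨ ∀ r' c', ¬ pvInB g r' c') (n : Nat) :
    ∀ (a h0 : Int) (cs0 : PySem.Dict (Int × Int × Int) Int)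
      (q0 : List (Int × Int × Int × Int)), 0 ≤ a → a + (n : Int) ≤ mx →
      ((∀ k : Int, 1 ≤ k → k ≤ a → pvInB g (r + pvDR nd * k) (c + pvDC nd * k)) ∧
          h0 = pvWsum g r c (pvDR nd) (pvDC nd) a.toNat ∨
        ∃ k : Int, 1 ≤ k ∧ k ≤ a ∧ ¬ pvInB g (r + pvDR nd * k) (c + pvDC nd * k)) →
      (∀ i : Int, pvEdgeD g mn mx r c nd i → i ≤ a →
        ∃ u, cs0.get? (pvTgt r c nd i) = some u ∧
          u ≤ p + pvWsum g r c (pvDR nd) (pvDC nd) i.toNat) →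
      (∀ e ∈ q0,
          e ∈ ((PySem.List.pyRange (a+1) (a+1+(n:Int)) 1).foldl
            (pvBodyA g p r c nd mn (pvDR nd) (pvDC nd)) (h0, cs0, q0)).2.2) ∧
      (∀ e ∈ ((PySem.List.pyRange (a+1) (a+1+(n:Int)) 1).foldl
            (pvBodyA g p r c nd mn (pvDR nd) (pvDC nd)) (h0, cs0, q0)).2.2,
          e ∈ q0 ∨ ∃ i, pvEdgeD g mn mx r c nd i ∧
            e = (p + pvWsum g r c (pvDR nd) (pvDC nd) i.toNat,
                 r + pvDR nd * i, c + pvDC nd * i, nd)) ∧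
      (∀ i : Int, pvEdgeD g mn mx r c nd i → i ≤ a + n →
        ∃ u, (((PySem.List.pyRange (a+1) (a+1+(n:Int)) 1).foldl
            (pvBodyA g p r c nd mn (pvDR nd) (pvDC nd)) (h0, cs0, q0)).2.1).get?
              (pvTgt r c nd i) = some u ∧
          u ≤ p + pvWsum g r c (pvDR nd) (pvDC nd) i.toNat) ∧
      (∀ t v', (((PySem.List.pyRange (a+1) (a+1+(n:Int)) 1).foldl
            (pvBodyA g p r c nd mn (pvDR nd) (pvDC nd)) (h0, cs0, q0)).2.1).get? t = some v' →
          cs0.get? t = some v' ∨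
          ∃ e ∈ ((PySem.List.pyRange (a+1) (a+1+(n:Int)) 1).foldl
            (pvBodyA g p r c nd mn (pvDR nd) (pvDC nd)) (h0, cs0, q0)).2.2,
            pvES e = t ∧ e.1 = v') ∧
      (∀ t v, cs0.get? t = some v →
        ∃ v', v' ≤ v ∧ (((PySem.List.pyRange (a+1) (a+1+(n:Int)) 1).foldl
            (pvBodyA g p r c nd mn (pvDR nd) (pvDC nd)) (h0, cs0, q0)).2.1).get? t = some v') ∧
      ((PySem.List.pyRange (a+1) (a+1+(n:Int)) 1).foldl
            (pvBodyA g p r c nd mn (pvDR nd) (pvDC nd)) (h0, cs0, q0)).2.2.length ≤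
        q0.length + n := by
  induction n with
  | zero =>
    intro a h0 cs0 q0 ha hmx hH hP3
    rw [show a + 1 + ((0 : Nat) : Int) = a + 1 by push_cast; ring,
      PySem.List.pyRange_one_eq_nil le_rfl]
    simp only [List.foldl_nil]
    refine ⟨fun e he => he, fun e he => Or.inl he, ?_, fun t v' hv => Or.inl hv,
      fun t v hv => ⟨v, le_rfl, hv⟩, by simp⟩
    intro i hi hle
    exact hP3 i hi (by push_cast at hle; omega)
  | succ m ih =>
    intro a h0 cs0 q0 ha hmx hH hP3
    rw [show a + 1 + ((m + 1 : Nat) : Int) = (a + 1) + 1 + (m : Int) by push_cast; ring,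
      PySem.List.pyRange_one_cons (by push_cast at hmx ⊢; omega)]
    simp only [List.foldl_cons]
    have hstep : ∃ h1 cs1 q1,
        pvBodyA g p r c nd mn (pvDR nd) (pvDC nd) (h0, cs0, q0) (a + 1) = (h1, cs1, q1) ∧
        ((∀ k : Int, 1 ≤ k → k ≤ a + 1 → pvInB g (r + pvDR nd * k) (c + pvDC nd * k)) ∧
            h1 = pvWsum g r c (pvDR nd) (pvDC nd) (a + 1).toNat ∨
          ∃ k : Int, 1 ≤ k ∧ k ≤ a + 1 ∧ ¬ pvInB g (r + pvDR nd * k) (c + pvDC nd * k)) ∧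
        (∀ i : Int, pvEdgeD g mn mx r c nd i → i ≤ a + 1 →
          ∃ u, cs1.get? (pvTgt r c nd i) = some u ∧
            u ≤ p + pvWsum g r c (pvDR nd) (pvDC nd) i.toNat) ∧
        (∀ e ∈ q0, e ∈ q1) ∧
        (∀ e ∈ q1, e ∈ q0 ∨ ∃ i, pvEdgeD g mn mx r c nd i ∧
          e = (p + pvWsum g r c (pvDR nd) (pvDC nd) i.toNat,
               r + pvDR nd * i, c + pvDC nd * i, nd)) ∧
        (∀ t v', cs1.get? t = some v' → cs0.get? t = some v' ∨
          ∃ e ∈ q1, pvES e = t ∧ e.1 = v') ∧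
        (∀ t v, cs0.get? t = some v → ∃ v', v' ≤ v ∧ cs1.get? t = some v') ∧
        q1.length ≤ q0.length + 1 := by
      by_cases hb : pvInB g (r + pvDR nd * (a + 1)) (c + pvDC nd * (a + 1))
      · have hH1 : (∀ k : Int, 1 ≤ k → k ≤ a → pvInB g (r + pvDR nd * k) (c + pvDC nd * k)) ∧
            h0 = pvWsum g r c (pvDR nd) (pvDC nd) a.toNat := by
          rcases hH with h | ⟨k, hk1, hk2, hk3⟩
          · exact h
          · rcases hsrc with hs | hs
            · exact absurd hb (pvAbsorb g nd hnd r c hs hk1 (by omega) hk3)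
            · exact absurd hb (hs _ _)
        obtain ⟨hall, rfl⟩ := hH1
        have hWs : pvWsum g r c (pvDR nd) (pvDC nd) a.toNat + pvCell g (r + pvDR nd * (a + 1)) (c + pvDC nd * (a + 1)) = pvWsum g r c (pvDR nd) (pvDC nd) (a + 1).toNat :=
          (pvWsum_step g r c _ _ a ha).symm
        have hallS : ∀ k : Int, 1 ≤ k → k ≤ a + 1 →
            pvInB g (r + pvDR nd * k) (c + pvDC nd * k) := by
          intro k hk1 hk2
          rcases eq_or_lt_of_le hk2 with rfl | hlt
          · exact hb
          · exact hall k hk1 (by omega)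
        have hbprop : (0:Int) ≤ r + pvDR nd * (a + 1) ∧ r + pvDR nd * (a + 1) < (g.length : Int) ∧ 0 ≤ c + pvDC nd * (a + 1) ∧
            c + pvDC nd * (a + 1) < ((g.headD []).length : Int) := hb
        by_cases hmn : mn ≤ a + 1
        · by_cases hcond : cs0.contains (r + pvDR nd * (a + 1), c + pvDC nd * (a + 1), nd) = true ∧
              cs0.getD (r + pvDR nd * (a + 1), c + pvDC nd * (a + 1), nd) 0 ≤ p + (pvWsum g r c (pvDR nd) (pvDC nd) a.toNat + pvCell g (r + pvDR nd * (a + 1)) (c + pvDC nd * (a + 1)))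
          · have hbody : pvBodyA g p r c nd mn (pvDR nd) (pvDC nd) (pvWsum g r c (pvDR nd) (pvDC nd) a.toNat, cs0, q0) (a + 1) =
                (pvWsum g r c (pvDR nd) (pvDC nd) a.toNat + pvCell g (r + pvDR nd * (a + 1)) (c + pvDC nd * (a + 1)), cs0, q0) := by
              show (if 0 ≤ r + pvDR nd * (a + 1) ∧ r + pvDR nd * (a + 1) < (g.length : Int) ∧ 0 ≤ c + pvDC nd * (a + 1) ∧ c + pvDC nd * (a + 1) < ((g.headD []).length : Int) then
              let h := pvWsum g r c (pvDR nd) (pvDC nd) a.toNat + pvCell g (r + pvDR nd * (a + 1)) (c + pvDC nd * (a + 1))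
              if mn ≤ a + 1 then
                if cs0.contains (r + pvDR nd * (a + 1), c + pvDC nd * (a + 1), nd) ∧ cs0.getD (r + pvDR nd * (a + 1), c + pvDC nd * (a + 1), nd) 0 ≤ p + h then (h, cs0, q0)
                else (h, cs0.insert (r + pvDR nd * (a + 1), c + pvDC nd * (a + 1), nd) (p + h), q0 ++ [(p + h, r + pvDR nd * (a + 1), c + pvDC nd * (a + 1), nd)])
              else (h, cs0, q0)
            else (pvWsum g r c (pvDR nd) (pvDC nd) a.toNat, cs0, q0)) = _
              rw [if_pos hbprop]
              simp only []
              rw [if_pos hmn, if_pos hcond]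
            refine ⟨pvWsum g r c (pvDR nd) (pvDC nd) a.toNat + pvCell g (r + pvDR nd * (a + 1)) (c + pvDC nd * (a + 1)), cs0, q0, hbody, Or.inl ⟨hallS, hWs⟩, ?_, fun e he => he,
              fun e he => Or.inl he, fun t v' hv => Or.inl hv,
              fun t v hv => ⟨v, le_rfl, hv⟩, by omega⟩
            intro i hi hle
            rcases eq_or_lt_of_le hle with rfl | hlt
            · have hsome := PySem.Dict.contains_eq_isSome_get? (d := cs0) (k := (r + pvDR nd * (a + 1), c + pvDC nd * (a + 1), nd))
              rw [hcond.1] at hsome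
              rcases hv : cs0.get? (r + pvDR nd * (a + 1), c + pvDC nd * (a + 1), nd) with _ | u
              · rw [hv] at hsome; simp at hsome
              · have hgd : cs0.getD (r + pvDR nd * (a + 1), c + pvDC nd * (a + 1), nd) 0 = u := by
                  rw [PySem.Dict.getD_eq_get?_getD, hv]; rfl
                refine ⟨u, by rw [show pvTgt r c nd (a+1) = (r + pvDR nd * (a + 1), c + pvDC nd * (a + 1), nd) from rfl, hv], ?_⟩
                rw [hgd] at hcond
                rw [← hWs]
                exact hcond.2
            · exact hP3 i hi (by omega)
          · have hbody : pvBodyA g p r c nd mn (pvDR nd) (pvDC nd) (pvWsum g r c (pvDR nd) (pvDC nd) a.toNat, cs0, q0) (a + 1) =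
                (pvWsum g r c (pvDR nd) (pvDC nd) a.toNat + pvCell g (r + pvDR nd * (a + 1)) (c + pvDC nd * (a + 1)), cs0.insert (r + pvDR nd * (a + 1), c + pvDC nd * (a + 1), nd) (p + (pvWsum g r c (pvDR nd) (pvDC nd) a.toNat + pvCell g (r + pvDR nd * (a + 1)) (c + pvDC nd * (a + 1)))),
                  q0 ++ [(p + (pvWsum g r c (pvDR nd) (pvDC nd) a.toNat + pvCell g (r + pvDR nd * (a + 1)) (c + pvDC nd * (a + 1))), r + pvDR nd * (a + 1), c + pvDC nd * (a + 1), nd)]) := by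
              show (if 0 ≤ r + pvDR nd * (a + 1) ∧ r + pvDR nd * (a + 1) < (g.length : Int) ∧ 0 ≤ c + pvDC nd * (a + 1) ∧ c + pvDC nd * (a + 1) < ((g.headD []).length : Int) then
              let h := pvWsum g r c (pvDR nd) (pvDC nd) a.toNat + pvCell g (r + pvDR nd * (a + 1)) (c + pvDC nd * (a + 1))
              if mn ≤ a + 1 then
                if cs0.contains (r + pvDR nd * (a + 1), c + pvDC nd * (a + 1), nd) ∧ cs0.getD (r + pvDR nd * (a + 1), c + pvDC nd * (a + 1), nd) 0 ≤ p + h then (h, cs0, q0)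
                else (h, cs0.insert (r + pvDR nd * (a + 1), c + pvDC nd * (a + 1), nd) (p + h), q0 ++ [(p + h, r + pvDR nd * (a + 1), c + pvDC nd * (a + 1), nd)])
              else (h, cs0, q0)
            else (pvWsum g r c (pvDR nd) (pvDC nd) a.toNat, cs0, q0)) = _
              rw [if_pos hbprop]
              simp only []
              rw [if_pos hmn, if_neg hcond]
            refine ⟨_, _, _, hbody, Or.inl ⟨hallS, hWs⟩, ?_, fun e he => List.mem_append_left _ he,
              ?_, ?_, ?_, by simp⟩
            · -- P3 after the insert
              intro i hi hle
              by_cases heq : pvTgt r c nd i = (r + pvDR nd * (a + 1), c + pvDC nd * (a + 1), nd)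
              · rw [heq, PySem.Dict.get?_insert_self]
                refine ⟨p + (pvWsum g r c (pvDR nd) (pvDC nd) a.toNat + pvCell g (r + pvDR nd * (a + 1)) (c + pvDC nd * (a + 1))), rfl, ?_⟩
                rcases eq_or_lt_of_le hle with rfl | hlt
                · rw [hWs]
                · obtain ⟨u, hu, hub⟩ := hP3 i hi (by omega)
                  rw [heq] at hu
                  have hcont : cs0.contains (r + pvDR nd * (a + 1), c + pvDC nd * (a + 1), nd) = true := by
                    rw [PySem.Dict.contains_eq_isSome_get?, hu]; rfl
                  have hgd : cs0.getD (r + pvDR nd * (a + 1), c + pvDC nd * (a + 1), nd) 0 = u := by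
                    rw [PySem.Dict.getD_eq_get?_getD, hu]; rfl
                  have hnle : ¬ cs0.getD (r + pvDR nd * (a + 1), c + pvDC nd * (a + 1), nd) 0 ≤ p + (pvWsum g r c (pvDR nd) (pvDC nd) a.toNat + pvCell g (r + pvDR nd * (a + 1)) (c + pvDC nd * (a + 1))) := by
                    intro hc; exact hcond ⟨hcont, hc⟩
                  omega
              · obtain ⟨u, hu, hub⟩ := hP3 i hi (by
                  rcases eq_or_lt_of_le hle with heq2 | hlt
                  · exact absurd (by rw [heq2]; exact rfl) heq
                  · omega)
                exact ⟨u, by rw [PySem.Dict.get?_insert, if_neg heq]; exact hu, hub⟩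
            · intro e he
              rcases List.mem_append.mp he with h | h
              · exact Or.inl h
              · simp only [List.mem_singleton] at h
                refine Or.inr ⟨a + 1, ⟨by omega, hmn, by push_cast at hmx; omega, hallS⟩, ?_⟩
                rw [h, hWs]
            · intro t v' hv
              rw [PySem.Dict.get?_insert] at hv
              by_cases heq : t = (r + pvDR nd * (a + 1), c + pvDC nd * (a + 1), nd)
              · rw [if_pos heq] at hv
                refine Or.inr ⟨(p + (pvWsum g r c (pvDR nd) (pvDC nd) a.toNat + pvCell g (r + pvDR nd * (a + 1)) (c + pvDC nd * (a + 1))), r + pvDR nd * (a + 1), c + pvDC nd * (a + 1), nd),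
                  List.mem_append_right _ (by simp), by rw [heq]; rfl, by
                    simp only [Option.some.injEq] at hv; rw [← hv]⟩
              · rw [if_neg heq] at hv; exact Or.inl hv
            · intro t v hv
              by_cases heq : t = (r + pvDR nd * (a + 1), c + pvDC nd * (a + 1), nd)
              · have hv' : cs0.get? (r + pvDR nd * (a + 1), c + pvDC nd * (a + 1), nd) = some v := by rw [← heq]; exact hv
                have hcont : cs0.contains (r + pvDR nd * (a + 1), c + pvDC nd * (a + 1), nd) = true := by
                  rw [PySem.Dict.contains_eq_isSome_get?, hv']; rfl
                have hgd : cs0.getD (r + pvDR nd * (a + 1), c + pvDC nd * (a + 1), nd) 0 = v := by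
                  rw [PySem.Dict.getD_eq_get?_getD, hv']; rfl
                have hnle : ¬ cs0.getD (r + pvDR nd * (a + 1), c + pvDC nd * (a + 1), nd) 0 ≤ p + (pvWsum g r c (pvDR nd) (pvDC nd) a.toNat + pvCell g (r + pvDR nd * (a + 1)) (c + pvDC nd * (a + 1))) := fun hc => hcond ⟨hcont, hc⟩
                exact ⟨p + (pvWsum g r c (pvDR nd) (pvDC nd) a.toNat + pvCell g (r + pvDR nd * (a + 1)) (c + pvDC nd * (a + 1))), by omega, by rw [heq, PySem.Dict.get?_insert_self]⟩
              · exact ⟨v, le_rfl, by rw [PySem.Dict.get?_insert, if_neg heq]; exact hv⟩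
        · have hbody : pvBodyA g p r c nd mn (pvDR nd) (pvDC nd) (pvWsum g r c (pvDR nd) (pvDC nd) a.toNat, cs0, q0) (a + 1) =
              (pvWsum g r c (pvDR nd) (pvDC nd) a.toNat + pvCell g (r + pvDR nd * (a + 1)) (c + pvDC nd * (a + 1)), cs0, q0) := by
            show (if 0 ≤ r + pvDR nd * (a + 1) ∧ r + pvDR nd * (a + 1) < (g.length : Int) ∧ 0 ≤ c + pvDC nd * (a + 1) ∧ c + pvDC nd * (a + 1) < ((g.headD []).length : Int) then
              let h := pvWsum g r c (pvDR nd) (pvDC nd) a.toNat + pvCell g (r + pvDR nd * (a + 1)) (c + pvDC nd * (a + 1))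
              if mn ≤ a + 1 then
                if cs0.contains (r + pvDR nd * (a + 1), c + pvDC nd * (a + 1), nd) ∧ cs0.getD (r + pvDR nd * (a + 1), c + pvDC nd * (a + 1), nd) 0 ≤ p + h then (h, cs0, q0)
                else (h, cs0.insert (r + pvDR nd * (a + 1), c + pvDC nd * (a + 1), nd) (p + h), q0 ++ [(p + h, r + pvDR nd * (a + 1), c + pvDC nd * (a + 1), nd)])
              else (h, cs0, q0)
            else (pvWsum g r c (pvDR nd) (pvDC nd) a.toNat, cs0, q0)) = _
            rw [if_pos hbprop]
            simp only []
            rw [if_neg hmn]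
          refine ⟨pvWsum g r c (pvDR nd) (pvDC nd) a.toNat + pvCell g (r + pvDR nd * (a + 1)) (c + pvDC nd * (a + 1)), cs0, q0, hbody, Or.inl ⟨hallS, hWs⟩, ?_, fun e he => he,
            fun e he => Or.inl he, fun t v' hv => Or.inl hv,
            fun t v hv => ⟨v, le_rfl, hv⟩, by omega⟩
          intro i hi hle
          rcases eq_or_lt_of_le hle with rfl | hlt
          · exact absurd hi.2.1 hmn
          · exact hP3 i hi (by omega)
      · have hbody : pvBodyA g p r c nd mn (pvDR nd) (pvDC nd) (h0, cs0, q0) (a + 1) =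
            (h0, cs0, q0) := by
          show (if 0 ≤ r + pvDR nd * (a + 1) ∧ r + pvDR nd * (a + 1) < (g.length : Int) ∧ 0 ≤ c + pvDC nd * (a + 1) ∧ c + pvDC nd * (a + 1) < ((g.headD []).length : Int) then
              let h := h0 + pvCell g (r + pvDR nd * (a + 1)) (c + pvDC nd * (a + 1))
              if mn ≤ a + 1 then
                if cs0.contains (r + pvDR nd * (a + 1), c + pvDC nd * (a + 1), nd) ∧ cs0.getD (r + pvDR nd * (a + 1), c + pvDC nd * (a + 1), nd) 0 ≤ p + h then (h, cs0, q0)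
                else (h, cs0.insert (r + pvDR nd * (a + 1), c + pvDC nd * (a + 1), nd) (p + h), q0 ++ [(p + h, r + pvDR nd * (a + 1), c + pvDC nd * (a + 1), nd)])
              else (h, cs0, q0)
            else (h0, cs0, q0)) = _
          rw [if_neg (show ¬ ((0:Int) ≤ r + pvDR nd * (a + 1) ∧ r + pvDR nd * (a + 1) < (g.length : Int) ∧ 0 ≤ c + pvDC nd * (a + 1) ∧
            c + pvDC nd * (a + 1) < ((g.headD []).length : Int)) from hb)]
        refine ⟨h0, cs0, q0, hbody, Or.inr ⟨a + 1, by omega, le_rfl, hb⟩, ?_, fun e he => he,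
          fun e he => Or.inl he, fun t v' hv => Or.inl hv,
          fun t v hv => ⟨v, le_rfl, hv⟩, by omega⟩
        intro i hi hle
        rcases eq_or_lt_of_le hle with rfl | hlt
        · exact absurd (hi.2.2.2 (a+1) hi.1 le_rfl) hb
        · exact hP3 i hi (by omega)
    obtain ⟨h1, cs1, q1, hbody, hH1, hP31, hq01, hq1new, hcs1P4, hcs1P5, hlen1⟩ := hstep
    rw [hbody]
    have hrec := ih (a + 1) h1 cs1 q1 (by omega) (by push_cast at hmx ⊢; omega) hH1 hP31
    obtain ⟨r1, r2, r3, r4, r5, r6⟩ := hrec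
    refine ⟨fun e he => r1 e (hq01 e he), ?_, ?_, ?_, ?_, by omega⟩
    · intro e he
      rcases r2 e he with h | h
      · exact hq1new e h
      · exact Or.inr h
    · intro i hi hle
      exact r3 i hi (by push_cast at hle ⊢; omega)
    · intro t v' hv
      rcases r4 t v' hv with h | h
      · rcases hcs1P4 t v' h with h' | ⟨e, he, hes, hep⟩
        · exact Or.inl h'
        · exact Or.inr ⟨e, r1 e he, hes, hep⟩
      · exact Or.inr h
    · intro t v hv
      obtain ⟨v1, hv1, hv1'⟩ := hcs1P5 t v hv
      obtain ⟨v2, hv2, hv2'⟩ := r5 t v1 hv1'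
      exact ⟨v2, by omega, hv2'⟩

theorem pvScanASpec (g : List (List Int)) (mn mx p r c nd : Int)
    (hnd : nd = 0 ∨ nd = 1 ∨ nd = 2 ∨ nd = 3)
    (hsrc : pvInB g r c ∨ ∀ r' c', ¬ pvInB g r' c')
    (cs : PySem.Dict (Int × Int × Int) Int) (q : List (Int × Int × Int × Int)) :
    (∀ e ∈ q, e ∈ (pvScanA g p r c nd mn mx (pvDR nd) (pvDC nd) cs q).2) ∧
    (∀ e ∈ (pvScanA g p r c nd mn mx (pvDR nd) (pvDC nd) cs q).2,
        e ∈ q ∨ ∃ i, pvEdgeD g mn mx r c nd i ∧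
          e = (p + pvWsum g r c (pvDR nd) (pvDC nd) i.toNat,
               r + pvDR nd * i, c + pvDC nd * i, nd)) ∧
    (∀ i : Int, pvEdgeD g mn mx r c nd i →
      ∃ u, (pvScanA g p r c nd mn mx (pvDR nd) (pvDC nd) cs q).1.get? (pvTgt r c nd i) = some u ∧
        u ≤ p + pvWsum g r c (pvDR nd) (pvDC nd) i.toNat) ∧
    (∀ t v', (pvScanA g p r c nd mn mx (pvDR nd) (pvDC nd) cs q).1.get? t = some v' →
        cs.get? t = some v' ∨
        ∃ e ∈ (pvScanA g p r c nd mn mx (pvDR nd) (pvDC nd) cs q).2, pvES e = t ∧ e.1 = v') ∧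
    (∀ t v, cs.get? t = some v →
      ∃ v', v' ≤ v ∧ (pvScanA g p r c nd mn mx (pvDR nd) (pvDC nd) cs q).1.get? t = some v') ∧
    (pvScanA g p r c nd mn mx (pvDR nd) (pvDC nd) cs q).2.length ≤ q.length + mx.toNat := by
  rcases le_or_gt 0 mx with hmx | hmx
  · have hrange : PySem.List.pyRange 1 (mx + 1) 1 =
        PySem.List.pyRange (0 + 1) (0 + 1 + (mx.toNat : Int)) 1 := by
      congr 1 <;> omega
    have haux := pvScanAAux g mn mx p r c nd hnd hsrc mx.toNat 0 0 cs q le_rfl (by omega)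
      (Or.inl ⟨fun k hk1 hk2 => absurd (le_trans hk1 hk2) (by omega), rfl⟩)
      (fun i hi hle => absurd (le_trans hi.1 hle) (by omega))
    obtain ⟨a1, a2, a3, a4, a5, a6⟩ := haux
    unfold pvScanA
    rw [hrange]
    refine ⟨a1, a2, ?_, a4, fun t v hv => a5 t v hv, a6⟩
    intro i hi
    exact a3 i hi (by have := hi.2.2.1; push_cast; omega)
  · have hrange : PySem.List.pyRange 1 (mx + 1) 1 = [] :=
      PySem.List.pyRange_one_eq_nil (by omega)
    unfold pvScanA
    rw [hrange]
    simp only [List.foldl_nil]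
    refine ⟨fun e he => he, fun e he => Or.inl he, ?_, fun t v' hv => Or.inl hv,
      fun t v hv => ⟨v, le_rfl, hv⟩, by simp⟩
    intro i hi
    exact absurd (le_trans hi.1 hi.2.2.1) (by omega)

theorem pvDirASpec (g : List (List Int)) (mn mx p r c dd : Int)
    (hsrc : pvInB g r c ∨ ∀ r' c', ¬ pvInB g r' c') (nd : Int)
    (hnd : nd = 0 ∨ nd = 1 ∨ nd = 2 ∨ nd = 3)
    (cs : PySem.Dict (Int × Int × Int) Int) (q : List (Int × Int × Int × Int)) :
    (∀ e ∈ (pvDirA g p r c dd mn mx (cs, q) nd).2, e ∈ q ∨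
        ∃ t w, pvEdge g mn mx (r, c, dd) t w ∧ e = (p + w, t.1, t.2.1, t.2.2)) ∧
    (∀ e ∈ q, e ∈ (pvDirA g p r c dd mn mx (cs, q) nd).2) ∧
    (pvAllowed dd nd → ∀ i : Int, pvEdgeD g mn mx r c nd i →
      ∃ u, (pvDirA g p r c dd mn mx (cs, q) nd).1.get? (pvTgt r c nd i) = some u ∧
        u ≤ p + pvWsum g r c (pvDR nd) (pvDC nd) i.toNat) ∧
    (∀ t v', (pvDirA g p r c dd mn mx (cs, q) nd).1.get? t = some v' →
        cs.get? t = some v' ∨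
        ∃ e ∈ (pvDirA g p r c dd mn mx (cs, q) nd).2, pvES e = t ∧ e.1 = v') ∧
    (∀ t v, cs.get? t = some v →
      ∃ v', v' ≤ v ∧ (pvDirA g p r c dd mn mx (cs, q) nd).1.get? t = some v') ∧
    (pvDirA g p r c dd mn mx (cs, q) nd).2.length ≤ q.length + mx.toNat := by
  by_cases hguard : nd = dd ∨ PySem.Int.mod (nd + 2) 4 = dd
  · have hda : pvDirA g p r c dd mn mx (cs, q) nd = (cs, q) := by
      unfold pvDirA; rw [if_pos hguard]
    rw [hda]
    exact ⟨fun e he => Or.inl he, fun e he => he,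
      fun hall => absurd hguard hall.2, fun t v' hv => Or.inl hv,
      fun t v hv => ⟨v, le_rfl, hv⟩, by simp⟩
  · have hda : pvDirA g p r c dd mn mx (cs, q) nd =
        pvScanA g p r c nd mn mx (pvDR nd) (pvDC nd) cs q := by
      unfold pvDirA; rw [if_neg hguard]; rfl
    rw [hda]
    obtain ⟨s1, s2, s3, s4, s5, s6⟩ := pvScanASpec g mn mx p r c nd hnd hsrc cs q
    refine ⟨?_, s1, fun _ i hi => s3 i hi, s4, s5, s6⟩
    intro e he
    rcases s2 e he with h | ⟨i, hi, he2⟩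
    · exact Or.inl h
    · refine Or.inr ⟨pvTgt r c nd i, pvWsum g r c (pvDR nd) (pvDC nd) i.toNat,
        ⟨nd, i, ⟨hnd, hguard⟩, hi, rfl, rfl⟩, by rw [he2]; rfl⟩

theorem pvExpandASpec (g : List (List Int)) (mn mx p r c dd : Int)
    (hsrc : pvInB g r c ∨ ∀ r' c', ¬ pvInB g r' c')
    (cs : PySem.Dict (Int × Int × Int) Int) (q : List (Int × Int × Int × Int)) :
    (∀ e ∈ q, e ∈ (pvExpandA g p r c dd mn mx cs q).2) ∧
    (∀ e ∈ (pvExpandA g p r c dd mn mx cs q).2, e ∈ q ∨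
        ∃ t w, pvEdge g mn mx (r, c, dd) t w ∧ e = (p + w, t.1, t.2.1, t.2.2)) ∧
    (∀ t w, pvEdge g mn mx (r, c, dd) t w →
      ∃ u, (pvExpandA g p r c dd mn mx cs q).1.get? t = some u ∧ u ≤ p + w) ∧
    (∀ t v', (pvExpandA g p r c dd mn mx cs q).1.get? t = some v' →
        cs.get? t = some v' ∨
        ∃ e ∈ (pvExpandA g p r c dd mn mx cs q).2, pvES e = t ∧ e.1 = v') ∧
    (∀ t v, cs.get? t = some v →
      ∃ v', v' ≤ v ∧ (pvExpandA g p r c dd mn mx cs q).1.get? t = some v') ∧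
    (pvExpandA g p r c dd mn mx cs q).2.length ≤ q.length + 4 * mx.toNat := by
  have hrange : PySem.List.pyRange 0 4 1 = [0, 1, 2, 3] := by decide
  have hexp : pvExpandA g p r c dd mn mx cs q =
      pvDirA g p r c dd mn mx (pvDirA g p r c dd mn mx (pvDirA g p r c dd mn mx
        (pvDirA g p r c dd mn mx (cs, q) 0) 1) 2) 3 := by
    unfold pvExpandA; rw [hrange]; rfl
  obtain ⟨a1, b1, c1, d1, e1, f1⟩ := pvDirASpec g mn mx p r c dd hsrc 0 (by tauto) cs q
  have E1 : pvDirA g p r c dd mn mx (cs, q) 0 =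
      ((pvDirA g p r c dd mn mx (cs, q) 0).1, (pvDirA g p r c dd mn mx (cs, q) 0).2) := rfl
  obtain ⟨a2, b2, c2, d2, e2, f2⟩ := pvDirASpec g mn mx p r c dd hsrc 1 (by tauto)
    (pvDirA g p r c dd mn mx (cs, q) 0).1 (pvDirA g p r c dd mn mx (cs, q) 0).2
  rw [← E1] at a2 b2 c2 d2 e2 f2
  have E2 : pvDirA g p r c dd mn mx (pvDirA g p r c dd mn mx (cs, q) 0) 1 =
      ((pvDirA g p r c dd mn mx (pvDirA g p r c dd mn mx (cs, q) 0) 1).1,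
       (pvDirA g p r c dd mn mx (pvDirA g p r c dd mn mx (cs, q) 0) 1).2) := rfl
  obtain ⟨a3, b3, c3, d3, e3, f3⟩ := pvDirASpec g mn mx p r c dd hsrc 2 (by tauto)
    (pvDirA g p r c dd mn mx (pvDirA g p r c dd mn mx (cs, q) 0) 1).1
    (pvDirA g p r c dd mn mx (pvDirA g p r c dd mn mx (cs, q) 0) 1).2
  rw [← E2] at a3 b3 c3 d3 e3 f3
  have E3 : pvDirA g p r c dd mn mx (pvDirA g p r c dd mn mx (pvDirA g p r c dd mn mx (cs, q) 0) 1) 2 =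
      ((pvDirA g p r c dd mn mx (pvDirA g p r c dd mn mx (pvDirA g p r c dd mn mx (cs, q) 0) 1) 2).1,
       (pvDirA g p r c dd mn mx (pvDirA g p r c dd mn mx (pvDirA g p r c dd mn mx (cs, q) 0) 1) 2).2) := rfl
  obtain ⟨a4, b4, c4, d4, e4, f4⟩ := pvDirASpec g mn mx p r c dd hsrc 3 (by tauto)
    (pvDirA g p r c dd mn mx (pvDirA g p r c dd mn mx (pvDirA g p r c dd mn mx (cs, q) 0) 1) 2).1
    (pvDirA g p r c dd mn mx (pvDirA g p r c dd mn mx (pvDirA g p r c dd mn mx (cs, q) 0) 1) 2).2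
  rw [← E3] at a4 b4 c4 d4 e4 f4
  rw [hexp]
  refine ⟨?_, ?_, ?_, ?_, ?_, by omega⟩
  · intro e he
    exact b4 e (b3 e (b2 e (b1 e he)))
  · intro e he
    rcases a4 e he with h | h
    · rcases a3 e h with h2 | h2
      · rcases a2 e h2 with h3 | h3
        · exact a1 e h3
        · exact Or.inr h3
      · exact Or.inr h2
    · exact Or.inr h
  · intro t w hE
    obtain ⟨nd, i, hall, hD, rfl, rfl⟩ := hE
    dsimp only
    rcases hall.1 with rfl | rfl | rfl | rfl
    · obtain ⟨u, hu, hub⟩ := c1 hall i hD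
      obtain ⟨u2, hu2, hu2b⟩ := e2 _ u hu
      obtain ⟨u3, hu3, hu3b⟩ := e3 _ u2 hu2b
      obtain ⟨u4, hu4, hu4b⟩ := e4 _ u3 hu3b
      exact ⟨u4, hu4b, by omega⟩
    · obtain ⟨u, hu, hub⟩ := c2 hall i hD
      obtain ⟨u3, hu3, hu3b⟩ := e3 _ u hu
      obtain ⟨u4, hu4, hu4b⟩ := e4 _ u3 hu3b
      exact ⟨u4, hu4b, by omega⟩
    · obtain ⟨u, hu, hub⟩ := c3 hall i hD
      obtain ⟨u4, hu4, hu4b⟩ := e4 _ u hu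
      exact ⟨u4, hu4b, by omega⟩
    · obtain ⟨u, hu, hub⟩ := c4 hall i hD
      exact ⟨u, hu, hub⟩
  · intro t v' hv
    rcases d4 t v' hv with h | hx
    · rcases d3 t v' h with h2 | hx
      · rcases d2 t v' h2 with h3 | hx
        · rcases d1 t v' h3 with h4 | hx
          · exact Or.inl h4
          · obtain ⟨e, he, hes, hep⟩ := hx
            exact Or.inr ⟨e, b4 e (b3 e (b2 e he)), hes, hep⟩
        · obtain ⟨e, he, hes, hep⟩ := hx
          exact Or.inr ⟨e, b4 e (b3 e he), hes, hep⟩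
      · obtain ⟨e, he, hes, hep⟩ := hx
        exact Or.inr ⟨e, b4 e he, hes, hep⟩
    · obtain ⟨e, he, hes, hep⟩ := hx
      exact Or.inr ⟨e, he, hes, hep⟩
  · intro t v hv
    obtain ⟨v1, hv1, hv1b⟩ := e1 t v hv
    obtain ⟨v2, hv2, hv2b⟩ := e2 t v1 hv1b
    obtain ⟨v3, hv3, hv3b⟩ := e3 t v2 hv2b
    obtain ⟨v4, hv4, hv4b⟩ := e4 t v3 hv3b
    exact ⟨v4, by omega, hv4b⟩

-- ===== A-side: Dijkstra invariant and loop correctness =====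

theorem pvReachNonneg (g : List (List Int)) (mn mx : Int) (hg : ∀ r c, 0 ≤ pvCell g r c)
    {t : Int × Int × Int} {c : Int} (h : pvReach g mn mx t c) : 0 ≤ c := by
  obtain ⟨l, hw⟩ := h
  exact pvWalkNonneg g mn mx hg hw

theorem pvSrcOK (g : List (List Int)) (mn mx : Int) {r c d p : Int}
    (h : pvReach g mn mx (r, c, d) p) :
    pvInB g r c ∨ ∀ r' c', ¬ pvInB g r' c' := by
  rcases pvReachState g mn mx h with heq | ⟨_, hb⟩
  · simp only [Prod.mk.injEq] at heq
    obtain ⟨rfl, rfl, rfl⟩ := heq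
    by_cases hdeg : 0 < (g.length : Int) ∧ 0 < ((g.headD []).length : Int)
    · exact Or.inl ⟨le_rfl, hdeg.1, le_rfl, hdeg.2⟩
    · refine Or.inr fun r' c' hc => hdeg ⟨by
        unfold pvInB at hc; omega, by unfold pvInB at hc; omega⟩
  · exact Or.inl hb

structure pvInvA (g : List (List Int)) (mn mx : Int)
    (P : Int × Int × Int → Int) (q : List (Int × Int × Int × Int))
    (vs : List (Int × Int × Int)) (cs : PySem.Dict (Int × Int × Int) Int) : Prop where
  e1 : ∀ e ∈ q, pvReach g mn mx (pvES e) e.1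
  c0 : (0, 0, -1) ∈ vs ∨ ∃ e ∈ q, pvES e = (0, 0, -1) ∧ e.1 ≤ 0
  c1 : ∀ t v, t ∉ vs → cs.get? t = some v → ∃ e ∈ q, pvES e = t ∧ e.1 ≤ v
  g1 : ∀ v ∈ vs, ∀ c, pvReach g mn mx v c → P v ≤ c
  g2 : ∀ v ∈ vs, ∀ t w, pvEdge g mn mx v t w → ∃ u, cs.get? t = some u ∧ u ≤ P v + w
  ng : ∀ v ∈ vs, ¬ pvGoal g v
  ndp : vs.Nodup
  vr : ∀ v ∈ vs, ∃ c, pvReach g mn mx v c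

theorem pvFrontier (g : List (List Int)) (mn mx : Int) (hg : ∀ r c, 0 ≤ pvCell g r c)
    {P : Int × Int × Int → Int} {q : List (Int × Int × Int × Int)}
    {vs : List (Int × Int × Int)} {cs : PySem.Dict (Int × Int × Int) Int}
    (hinv : pvInvA g mn mx P q vs cs) :
    ∀ t cc, pvReach g mn mx t cc → t ∈ vs ∨ ∃ e ∈ q, e.1 ≤ cc := by
  intro t cc ⟨l, hw⟩
  induction l using List.reverseRecOn generalizing t cc with
  | nil =>
    cases hw
    rcases hinv.c0 with h | ⟨e, he, _, hle⟩
    · exact Or.inl h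
    · exact Or.inr ⟨e, he, hle⟩
  | append_singleton l x ih =>
    obtain ⟨rfl, m, c1, w, hw1, he, rfl⟩ := pvWalkSnoc g mn mx hw
    have hwge : 0 ≤ w := pvEdgeNonneg g mn mx hg he
    rcases ih m c1 hw1 with hmvs | ⟨e, heq, hle⟩
    · obtain ⟨u, hu, hub⟩ := hinv.g2 m hmvs t w he
      have hPm : P m ≤ c1 := hinv.g1 m hmvs c1 ⟨l, hw1⟩
      by_cases hx : t ∈ vs
      · exact Or.inl hx
      · obtain ⟨e, he2, hes, hep⟩ := hinv.c1 t u hx hu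
        exact Or.inr ⟨e, he2, by omega⟩
    · exact Or.inr ⟨e, heq, by omega⟩

def pvMeasA (g : List (List Int)) (mx : Int)
    (q : List (Int × Int × Int × Int)) (vs : List (Int × Int × Int)) : Nat :=
  q.length + (1 + 4 * (g.length * (g.headD []).length) + 1 - vs.length) * (4 * mx.toNat + 2)

theorem pvVsBound (g : List (List Int)) (mn mx : Int)
    {P : Int × Int × Int → Int} {q : List (Int × Int × Int × Int)}
    {vs : List (Int × Int × Int)} {cs : PySem.Dict (Int × Int × Int) Int}
    (hinv : pvInvA g mn mx P q vs cs) :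
    vs.length ≤ 1 + 4 * (g.length * (g.headD []).length) := by
  refine le_trans (pvNodupLen g vs hinv.ndp ?_) (pvSpaceCard g)
  intro x hx
  obtain ⟨c, hc⟩ := hinv.vr x hx
  exact pvMemSpace g mn mx hc

theorem pvInvVisit (g : List (List Int)) (mn mx : Int) (hg : ∀ r c, 0 ≤ pvCell g r c)
    {P : Int × Int × Int → Int} {q : List (Int × Int × Int × Int)}
    {vs : List (Int × Int × Int)} {cs : PySem.Dict (Int × Int × Int) Int}
    (hinv : pvInvA g mn mx P q vs cs) (mp mr mc md : Int)
    (hm : (mp, mr, mc, md) ∈ q)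
    (hmin : ∀ e ∈ q, pvTupLe (mp, mr, mc, md) e = true)
    (hnvs : (mr, mc, md) ∉ vs) (hng : ¬ pvGoal g (mr, mc, md)) :
    pvInvA g mn mx (fun s => if s = (mr, mc, md) then mp else P s)
      (pvExpandA g mp mr mc md mn mx cs ((q.erase (mp, mr, mc, md)))).2
      (PySem.Set.add vs (mr, mc, md))
      (pvExpandA g mp mr mc md mn mx cs ((q.erase (mp, mr, mc, md)))).1 := by
  have hreachm : pvReach g mn mx (mr, mc, md) mp := hinv.e1 _ hm
  have hsrc : pvInB g mr mc ∨ ∀ r' c', ¬ pvInB g r' c' := pvSrcOK g mn mx hreachm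
  have hG1m : ∀ cc, pvReach g mn mx (mr, mc, md) cc → mp ≤ cc := by
    intro cc hcc
    rcases pvFrontier g mn mx hg hinv _ cc hcc with h | ⟨e, he, hle⟩
    · exact absurd h hnvs
    · exact le_trans (pvTupLe_fst (hmin e he)) hle
  have herase : ∀ e ∈ q.erase (mp, mr, mc, md), e ∈ q := fun e he => List.mem_of_mem_erase he
  have hkeep : ∀ e ∈ q, pvES e ≠ (mr, mc, md) → e ∈ q.erase (mp, mr, mc, md) := by
    intro e he hne
    apply (List.mem_erase_of_ne ?_).mpr he
    intro hc; exact hne (by rw [hc]; rfl)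
  obtain ⟨x1, x2, x3, x4, x5, x6⟩ := pvExpandASpec g mn mx mp mr mc md hsrc cs
    (q.erase (mp, mr, mc, md))
  have hmemadd : ∀ y, y ∈ PySem.Set.add vs (mr, mc, md) ↔ y ∈ vs ∨ y = (mr, mc, md) :=
    fun y => PySem.Set.mem_add vs (mr, mc, md) y
  refine ⟨?_, ?_, ?_, ?_, ?_, ?_, ?_, ?_⟩
  · -- e1
    intro e he
    rcases x2 e he with h | ⟨t, w, hE, rfl⟩
    · exact hinv.e1 e (herase e h)
    · exact pvReachStep g mn mx hreachm hE
  · -- c0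
    rcases hinv.c0 with h | ⟨e, he, hes, hep⟩
    · exact Or.inl ((hmemadd _).mpr (Or.inl h))
    · by_cases hstart : (0, 0, -1) ∈ vs ∨ ((0, 0, -1) : Int × Int × Int) = (mr, mc, md)
      · exact Or.inl ((hmemadd _).mpr hstart)
      · push Not at hstart
        refine Or.inr ⟨e, x1 e (hkeep e he (by rw [hes]; exact hstart.2)), hes, hep⟩
  · -- c1
    intro t v ht hv
    have htvs : t ∉ vs ∧ t ≠ (mr, mc, md) := by
      constructor
      · intro hc; exact ht ((hmemadd _).mpr (Or.inl hc))
      · intro hc; exact ht ((hmemadd _).mpr (Or.inr hc))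
    rcases x4 t v hv with h | ⟨e, he, hes, hep⟩
    · obtain ⟨e, he, hes, hep⟩ := hinv.c1 t v htvs.1 h
      exact ⟨e, x1 e (hkeep e he (by rw [hes]; exact htvs.2)), hes, hep⟩
    · exact ⟨e, he, hes, le_of_eq hep⟩
  · -- g1
    intro v hv cc hcc
    rcases (hmemadd v).mp hv with h | rfl
    · have hne : v ≠ (mr, mc, md) := fun hc => hnvs (hc ▸ h)
      rw [if_neg hne]
      exact hinv.g1 v h cc hcc
    · rw [if_pos rfl]
      exact hG1m cc hcc
  · -- g2
    intro v hv t w hE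
    rcases (hmemadd v).mp hv with h | rfl
    · have hne : v ≠ (mr, mc, md) := fun hc => hnvs (hc ▸ h)
      rw [if_neg hne]
      obtain ⟨u, hu, hub⟩ := hinv.g2 v h t w hE
      obtain ⟨u', hu', hu''⟩ := x5 t u hu
      exact ⟨u', hu'', by omega⟩
    · rw [if_pos rfl]
      obtain ⟨u, hu, hub⟩ := x3 t w hE
      exact ⟨u, hu, hub⟩
  · -- ng
    intro v hv
    rcases (hmemadd v).mp hv with h | rfl
    · exact hinv.ng v h
    · exact hng
  · -- nodup
    exact PySem.Set.nodup_add vs (mr, mc, md) hinv.ndp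
  · -- vr
    intro v hv
    rcases (hmemadd v).mp hv with h | rfl
    · exact hinv.vr v h
    · exact ⟨mp, hreachm⟩

theorem pvLoopANone (g : List (List Int)) (mn mx : Int)
    (hnone : ∀ t cc, pvGoal g t → ¬ pvReach g mn mx t cc) :
    ∀ f (q : List (Int × Int × Int × Int)) (vs : PySem.Set (Int × Int × Int))
      (cs : PySem.Dict (Int × Int × Int) Int),
      (∀ e ∈ q, pvReach g mn mx (pvES e) e.1) →
      pvLoopA g mn mx f q vs cs = none := by
  intro f
  induction f with
  | zero => intro q vs cs _; rfl
  | succ f ih =>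
    intro q vs cs he1
    cases q with
    | nil => simp [pvLoopA, pvHeapPop]
    | cons x tail =>
      rcases hm : pvMinOf x tail with ⟨mp, mr, mc, md⟩
      have hpop : pvHeapPop (x :: tail) =
          some ((mp, mr, mc, md), (x :: tail).erase (mp, mr, mc, md)) := by
        simp [pvHeapPop, hm]
      have hmem : (mp, mr, mc, md) ∈ x :: tail := hm ▸ pvMinOf_mem x tail
      have hreachm : pvReach g mn mx (mr, mc, md) mp := he1 _ hmem
      simp only [pvLoopA, hpop]
      have hngoal : ¬ (mr = (g.length : Int) - 1 ∧ mc = ((g.headD []).length : Int) - 1) := by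
        intro hc
        exact hnone (mr, mc, md) mp hc hreachm
      rw [if_neg hngoal]
      by_cases hvs : (mr, mc, md) ∈ vs
      · rw [if_pos hvs]
        exact ih _ _ _ (fun e he => he1 e (List.mem_of_mem_erase he))
      · rw [if_neg hvs]
        apply ih
        intro e he
        have hsrc := pvSrcOK g mn mx hreachm
        obtain ⟨x1, x2, x3, x4, x5, x6⟩ := pvExpandASpec g mn mx mp mr mc md hsrc cs
          ((x :: tail).erase (mp, mr, mc, md))
        rcases x2 e he with h | ⟨t, w, hE, rfl⟩
        · exact he1 e (List.mem_of_mem_erase h)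
        · exact pvReachStep g mn mx hreachm hE

theorem pvLoopASome (g : List (List Int)) (mn mx : Int) (hg : ∀ r c, 0 ≤ pvCell g r c)
    (hne : (pvGoalCosts g mn mx).Nonempty) :
    ∀ f (q : List (Int × Int × Int × Int)) (vs : PySem.Set (Int × Int × Int))
      (cs : PySem.Dict (Int × Int × Int) Int) (P : Int × Int × Int → Int),
      pvInvA g mn mx P q vs cs → pvMeasA g mx q vs ≤ f →
      pvLoopA g mn mx f q vs cs = some ((pvOpt g mn mx : Nat) : Int) := by
  have hoptmem : pvOpt g mn mx ∈ pvGoalCosts g mn mx := Nat.sInf_mem hne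
  obtain ⟨tg, htg, hreachg⟩ := hoptmem
  intro f
  induction f with
  | zero =>
    intro q vs cs P hinv hmeas
    exfalso
    have hb := pvVsBound g mn mx hinv
    unfold pvMeasA at hmeas
    have h1 : 1 ≤ 1 + 4 * (g.length * (g.headD []).length) + 1 - vs.length := by omega
    have h2 : 4 * mx.toNat + 2 ≤
        (1 + 4 * (g.length * (g.headD []).length) + 1 - vs.length) * (4 * mx.toNat + 2) := by
      calc 4 * mx.toNat + 2 = 1 * (4 * mx.toNat + 2) := by ring
        _ ≤ _ := Nat.mul_le_mul_right _ h1
    omega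
  | succ f ih =>
    intro q vs cs P hinv hmeas
    have hfr := pvFrontier g mn mx hg hinv tg _ hreachg
    have hq : ∃ e ∈ q, e.1 ≤ ((pvOpt g mn mx : Nat) : Int) := by
      rcases hfr with h | h
      · exact absurd (hinv.ng tg h) (fun hc => hc htg)
      · exact h
    obtain ⟨e0, he0, he0le⟩ := hq
    cases q with
    | nil => simp at he0
    | cons x tail =>
      rcases hm : pvMinOf x tail with ⟨mp, mr, mc, md⟩
      have hpop : pvHeapPop (x :: tail) =
          some ((mp, mr, mc, md), (x :: tail).erase (mp, mr, mc, md)) := by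
        simp [pvHeapPop, hm]
      have hmem : (mp, mr, mc, md) ∈ x :: tail := hm ▸ pvMinOf_mem x tail
      have hmin : ∀ e ∈ x :: tail, pvTupLe (mp, mr, mc, md) e = true :=
        fun e he => hm ▸ pvMinOf_le x tail e he
      have hreachm : pvReach g mn mx (mr, mc, md) mp := hinv.e1 _ hmem
      have hmple : mp ≤ ((pvOpt g mn mx : Nat) : Int) :=
        le_trans (pvTupLe_fst (hmin e0 he0)) he0le
      simp only [pvLoopA, hpop]
      by_cases hG : mr = (g.length : Int) - 1 ∧ mc = ((g.headD []).length : Int) - 1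
      · rw [if_pos hG]
        have hmp0 : 0 ≤ mp := pvReachNonneg g mn mx hg hreachm
        have hcost : mp.toNat ∈ pvGoalCosts g mn mx := by
          refine ⟨(mr, mc, md), hG, ?_⟩
          rw [show ((mp.toNat : Nat) : Int) = mp by omega]
          exact hreachm
        have hle2 : pvOpt g mn mx ≤ mp.toNat := Nat.sInf_le hcost
        congr 1
        omega
      · rw [if_neg hG]
        have hlen : (x :: tail).length - 1 = ((x :: tail).erase (mp, mr, mc, md)).length := by
          rw [List.length_erase_of_mem hmem]
        have hlpos : (x :: tail).length = tail.length + 1 := by simp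
        by_cases hvs : (mr, mc, md) ∈ vs
        · rw [if_pos hvs]
          apply ih _ _ _ P
          · exact ⟨fun e he => hinv.e1 e (List.mem_of_mem_erase he),
              (by
                rcases hinv.c0 with h | ⟨e, he, hes, hep⟩
                · exact Or.inl h
                · by_cases hsv : ((0 : Int), (0 : Int), (-1 : Int)) ∈ vs
                  · exact Or.inl hsv
                  · refine Or.inr ⟨e, (List.mem_erase_of_ne ?_).mpr he, hes, hep⟩
                    intro hc
                    apply hsv
                    rw [hc] at hes
                    have hes2 : ((mr, mc, md) : Int × Int × Int) = (0, 0, -1) := hes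
                    rw [← hes2]
                    exact hvs),
              (by
                intro t v ht hv
                obtain ⟨e, he, hes, hep⟩ := hinv.c1 t v ht hv
                refine ⟨e, (List.mem_erase_of_ne ?_).mpr he, hes, hep⟩
                intro hc
                apply ht
                rw [hc] at hes
                have hes2 : ((mr, mc, md) : Int × Int × Int) = t := hes
                rw [← hes2]
                exact hvs),
              hinv.g1, hinv.g2, hinv.ng, hinv.ndp, hinv.vr⟩
          · unfold pvMeasA at hmeas ⊢
            omega
        · rw [if_neg hvs]
          have hinv' := pvInvVisit g mn mx hg hinv mp mr mc md hmem hmin hvs hG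
          apply ih _ _ _ _ hinv'
          obtain ⟨x1, x2, x3, x4, x5, x6⟩ := pvExpandASpec g mn mx mp mr mc md
            (pvSrcOK g mn mx hreachm) cs ((x :: tail).erase (mp, mr, mc, md))
          have hvslen : vs.length ≤ 1 + 4 * (g.length * (g.headD []).length) :=
            pvVsBound g mn mx hinv
          have haddlen : (PySem.Set.add vs (mr, mc, md)).length = vs.length + 1 := by
            rw [PySem.Set.add_of_not_mem hvs, List.length_append]
            rfl
          have hfact : (1 + 4 * (g.length * (g.headD []).length) + 1 - vs.length) *
              (4 * mx.toNat + 2) =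
              (1 + 4 * (g.length * (g.headD []).length) + 1 - (vs.length + 1)) *
                (4 * mx.toNat + 2) + (4 * mx.toNat + 2) := by
            have h1 : 1 + 4 * (g.length * (g.headD []).length) + 1 - vs.length =
                (1 + 4 * (g.length * (g.headD []).length) + 1 - (vs.length + 1)) + 1 := by omega
            rw [h1, Nat.succ_mul]
          unfold pvMeasA at hmeas ⊢
          rw [hfact] at hmeas
          rw [haddlen]
          omega

theorem pvInvInit (g : List (List Int)) (mn mx : Int) :
    pvInvA g mn mx (fun _ => 0) [(0, 0, 0, -1)] [] PySem.Dict.empty := by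
  refine ⟨?_, ?_, ?_, ?_, ?_, ?_, ?_, ?_⟩
  · intro e he
    simp only [List.mem_singleton] at he
    subst he
    exact pvReachNil g mn mx
  · exact Or.inr ⟨(0, 0, 0, -1), by simp, rfl, le_rfl⟩
  · intro t v ht hv
    rw [PySem.Dict.get?_empty] at hv
    cases hv
  · intro v hv; cases hv
  · intro v hv; cases hv
  · intro v hv; cases hv
  · exact List.nodup_nil
  · intro v hv; cases hv

theorem pvSolveASome (d : String) (mn mx : Int) (hpre : Pre_solve d mn mx)
    (hne : (pvGoalCosts (pvParse d) mn mx).Nonempty) :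
    solve d mn mx = some ((pvOpt (pvParse d) mn mx : Nat) : Int) := by
  have hg := pvCellNonneg d mn mx hpre
  show pvLoopA (pvParse d) mn mx (pvFuel (pvParse d) mx) [(0, 0, 0, -1)] [] PySem.Dict.empty = _
  apply pvLoopASome (pvParse d) mn mx hg hne _ _ _ _ (fun _ => 0) (pvInvInit (pvParse d) mn mx)
  unfold pvMeasA pvFuel
  simp only [List.length_singleton, List.length_nil, Nat.sub_zero]
  have hco : 1 + 4 * ((pvParse d).length * ((pvParse d).headD []).length) + 1 =
      2 + 4 * ((pvParse d).length * ((pvParse d).headD []).length) := by omega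
  rw [hco]

theorem pvSolveANone (d : String) (mn mx : Int) (hpre : Pre_solve d mn mx)
    (hno : ¬ (pvGoalCosts (pvParse d) mn mx).Nonempty) :
    solve d mn mx = none := by
  have hg := pvCellNonneg d mn mx hpre
  show pvLoopA (pvParse d) mn mx (pvFuel (pvParse d) mx) [(0, 0, 0, -1)] [] PySem.Dict.empty = none
  apply pvLoopANone (pvParse d) mn mx
  · intro t cc hGl hR
    have hcc : 0 ≤ cc := pvReachNonneg (pvParse d) mn mx hg hR
    exact hno ⟨cc.toNat, t, hGl, by rw [show ((cc.toNat : Nat) : Int) = cc by omega]; exact hR⟩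
  · intro e he
    simp only [List.mem_singleton] at he
    subst he
    exact pvReachNil (pvParse d) mn mx

-- ===== B-side: fixed-round Bellman-Ford relaxation computes the same distances =====

theorem pvScanBAux (g : List (List Int)) (mn mx base r c nd : Int)
    (rows cols : Int) (hrows : rows = (g.length : Int)) (hcols : cols = ((g.headD []).length : Int)) (n : Nat) :
    ∀ (a h0 : Int) (stop0 : Bool) (D0 : PySem.Dict (Int × Int × Int) Int), 0 ≤ a → a + (n : Int) ≤ mx →
      ((stop0 = false ∧ (∀ k : Int, 1 ≤ k → k ≤ a → pvInB g (r + pvDR nd * k) (c + pvDC nd * k)) ∧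
          h0 = pvWsum g r c (pvDR nd) (pvDC nd) a.toNat) ∨
        (stop0 = true ∧ ∃ k : Int, 1 ≤ k ∧ k ≤ a ∧ ¬ pvInB g (r + pvDR nd * k) (c + pvDC nd * k))) →
      (∀ i : Int, pvEdgeD g mn mx r c nd i → i ≤ a →
        ∃ v, v ≤ base + pvWsum g r c (pvDR nd) (pvDC nd) i.toNat ∧
          D0.get? (pvTgt r c nd i) = some v) →
      (∀ i : Int, pvEdgeD g mn mx r c nd i → i ≤ a + n →
        ∃ v, v ≤ base + pvWsum g r c (pvDR nd) (pvDC nd) i.toNat ∧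
          (((PySem.List.pyRange (a+1) (a+1+(n:Int)) 1).foldl
            (pvStepB g rows cols mn r c base nd (pvDR nd) (pvDC nd)) (stop0, h0, D0)).2.2).get?
              (pvTgt r c nd i) = some v) ∧
      (∀ t v, (((PySem.List.pyRange (a+1) (a+1+(n:Int)) 1).foldl
            (pvStepB g rows cols mn r c base nd (pvDR nd) (pvDC nd)) (stop0, h0, D0)).2.2).get? t = some v →
          D0.get? t = some v ∨ ∃ i, pvEdgeD g mn mx r c nd i ∧ t = pvTgt r c nd i ∧
            v = base + pvWsum g r c (pvDR nd) (pvDC nd) i.toNat) ∧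
      (∀ t v, D0.get? t = some v →
        ∃ v', v' ≤ v ∧ (((PySem.List.pyRange (a+1) (a+1+(n:Int)) 1).foldl
            (pvStepB g rows cols mn r c base nd (pvDR nd) (pvDC nd)) (stop0, h0, D0)).2.2).get? t = some v') ∧
      (D0.keys.Nodup → (((PySem.List.pyRange (a+1) (a+1+(n:Int)) 1).foldl
            (pvStepB g rows cols mn r c base nd (pvDR nd) (pvDC nd)) (stop0, h0, D0)).2.2).keys.Nodup) := by
  subst hrows hcols
  induction n with
  | zero =>
    intro a h0 stop0 D0 ha hmx hH hP3
    rw [show a + 1 + ((0 : Nat) : Int) = a + 1 by push_cast; ring,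
      PySem.List.pyRange_one_eq_nil le_rfl]
    simp only [List.foldl_nil]
    refine ⟨?_, fun t v hv => Or.inl hv, fun t v hv => ⟨v, le_rfl, hv⟩, fun h => h⟩
    intro i hi hle
    exact hP3 i hi (by push_cast at hle; omega)
  | succ m ih =>
    intro a h0 stop0 D0 ha hmx hH hP3
    rw [show a + 1 + ((m + 1 : Nat) : Int) = (a + 1) + 1 + (m : Int) by push_cast; ring,
      PySem.List.pyRange_one_cons (by push_cast at hmx ⊢; omega)]
    simp only [List.foldl_cons]
    have hstep : ∃ (stop1 : Bool) (h1 : Int) (D1 : PySem.Dict (Int × Int × Int) Int),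
        pvStepB g (g.length : Int) ((g.headD []).length : Int) mn r c base nd (pvDR nd) (pvDC nd)
          (stop0, h0, D0) (a + 1) = (stop1, h1, D1) ∧
        ((stop1 = false ∧ (∀ k : Int, 1 ≤ k → k ≤ a + 1 → pvInB g (r + pvDR nd * k) (c + pvDC nd * k)) ∧
            h1 = pvWsum g r c (pvDR nd) (pvDC nd) (a + 1).toNat) ∨
          (stop1 = true ∧ ∃ k : Int, 1 ≤ k ∧ k ≤ a + 1 ∧ ¬ pvInB g (r + pvDR nd * k) (c + pvDC nd * k))) ∧
        (∀ i : Int, pvEdgeD g mn mx r c nd i → i ≤ a + 1 →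
          ∃ v, v ≤ base + pvWsum g r c (pvDR nd) (pvDC nd) i.toNat ∧
            D1.get? (pvTgt r c nd i) = some v) ∧
        (∀ t v, D1.get? t = some v → D0.get? t = some v ∨ ∃ i, pvEdgeD g mn mx r c nd i ∧
          t = pvTgt r c nd i ∧ v = base + pvWsum g r c (pvDR nd) (pvDC nd) i.toNat) ∧
        (∀ t v, D0.get? t = some v → ∃ v', v' ≤ v ∧ D1.get? t = some v') ∧
        (D0.keys.Nodup → D1.keys.Nodup) := by
      cases stop0 with
      | true =>
        rcases hH with ⟨hfalse, _⟩ | ⟨_, k, hk1, hk2, hk3⟩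
        · cases hfalse
        refine ⟨true, h0, D0, rfl, Or.inr ⟨rfl, k, hk1, by omega, hk3⟩, ?_,
          fun t v hv => Or.inl hv, fun t v hv => ⟨v, le_rfl, hv⟩, fun h => h⟩
        intro i hi hle
        rcases eq_or_lt_of_le hle with rfl | hlt
        · exact absurd (hi.2.2.2 k hk1 (by omega)) hk3
        · exact hP3 i hi (by omega)
      | false =>
        rcases hH with ⟨_, hall, rfl⟩ | ⟨hfalse, _⟩
        swap
        · cases hfalse
        by_cases hb : pvInB g (r + pvDR nd * (a + 1)) (c + pvDC nd * (a + 1))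
        · have hbprop : (0:Int) ≤ r + pvDR nd * (a+1) ∧ r + pvDR nd * (a+1) < (g.length : Int) ∧
              0 ≤ c + pvDC nd * (a+1) ∧ c + pvDC nd * (a+1) < ((g.headD []).length : Int) := hb
          have hWs : pvWsum g r c (pvDR nd) (pvDC nd) a.toNat +
              pvCell g (r + pvDR nd * (a + 1)) (c + pvDC nd * (a + 1)) =
              pvWsum g r c (pvDR nd) (pvDC nd) (a + 1).toNat :=
            (pvWsum_step g r c _ _ a ha).symm
          have hallS : ∀ k : Int, 1 ≤ k → k ≤ a + 1 →
              pvInB g (r + pvDR nd * k) (c + pvDC nd * k) := by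
            intro k hk1 hk2
            rcases eq_or_lt_of_le hk2 with rfl | hlt
            · exact hb
            · exact hall k hk1 (by omega)
          by_cases hmn : mn ≤ a + 1
          · by_cases hcond : ¬ D0.contains (r + pvDR nd * (a+1), c + pvDC nd * (a+1), nd) = true ∨
                base + (pvWsum g r c (pvDR nd) (pvDC nd) a.toNat +
                  pvCell g (r + pvDR nd * (a + 1)) (c + pvDC nd * (a + 1))) <
                  D0.getD (r + pvDR nd * (a+1), c + pvDC nd * (a+1), nd) 0
            · have hbody : pvStepB g (g.length : Int) ((g.headD []).length : Int) mn r c base nd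
                  (pvDR nd) (pvDC nd) (false, pvWsum g r c (pvDR nd) (pvDC nd) a.toNat, D0) (a + 1) =
                  (false, pvWsum g r c (pvDR nd) (pvDC nd) (a + 1).toNat,
                    D0.insert (r + pvDR nd * (a+1), c + pvDC nd * (a+1), nd)
                      (base + pvWsum g r c (pvDR nd) (pvDC nd) (a + 1).toNat)) := by
                show (if (false : Bool) = true then _ else
                  if 0 ≤ r + pvDR nd * (a+1) ∧ r + pvDR nd * (a+1) < (g.length : Int) ∧
                      0 ≤ c + pvDC nd * (a+1) ∧ c + pvDC nd * (a+1) < ((g.headD []).length : Int) then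
                    if mn ≤ a + 1 then
                      if ¬ D0.contains (r + pvDR nd * (a+1), c + pvDC nd * (a+1), nd) = true ∨
                          base + (pvWsum g r c (pvDR nd) (pvDC nd) a.toNat +
                            pvCell g (r + pvDR nd * (a + 1)) (c + pvDC nd * (a + 1))) <
                            D0.getD (r + pvDR nd * (a+1), c + pvDC nd * (a+1), nd) 0 then
                        (false, pvWsum g r c (pvDR nd) (pvDC nd) a.toNat +
                          pvCell g (r + pvDR nd * (a + 1)) (c + pvDC nd * (a + 1)),
                          D0.insert (r + pvDR nd * (a+1), c + pvDC nd * (a+1), nd)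
                            (base + (pvWsum g r c (pvDR nd) (pvDC nd) a.toNat +
                              pvCell g (r + pvDR nd * (a + 1)) (c + pvDC nd * (a + 1)))))
                      else (false, pvWsum g r c (pvDR nd) (pvDC nd) a.toNat +
                        pvCell g (r + pvDR nd * (a + 1)) (c + pvDC nd * (a + 1)), D0)
                    else (false, pvWsum g r c (pvDR nd) (pvDC nd) a.toNat +
                      pvCell g (r + pvDR nd * (a + 1)) (c + pvDC nd * (a + 1)), D0)
                  else (true, pvWsum g r c (pvDR nd) (pvDC nd) a.toNat, D0)) = _
                rw [if_neg (by simp), if_pos hbprop, if_pos hmn, if_pos hcond, hWs]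
              refine ⟨false, _, _, hbody, Or.inl ⟨rfl, hallS, rfl⟩, ?_, ?_, ?_, ?_⟩
              · intro i hi hle
                by_cases heq : pvTgt r c nd i = (r + pvDR nd * (a+1), c + pvDC nd * (a+1), nd)
                · rw [heq, PySem.Dict.get?_insert_self]
                  refine ⟨base + pvWsum g r c (pvDR nd) (pvDC nd) (a + 1).toNat, ?_, rfl⟩
                  rcases eq_or_lt_of_le hle with rfl | hlt
                  · exact le_rfl
                  · obtain ⟨v, hvb, hv⟩ := hP3 i hi (by omega)
                    rw [heq] at hv
                    have hcont : D0.contains (r + pvDR nd * (a+1), c + pvDC nd * (a+1), nd) = true := by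
                      rw [PySem.Dict.contains_eq_isSome_get?, hv]; rfl
                    have hgd : D0.getD (r + pvDR nd * (a+1), c + pvDC nd * (a+1), nd) 0 = v := by
                      rw [PySem.Dict.getD_eq_get?_getD, hv]; rfl
                    rcases hcond with hc | hc
                    · exact absurd hcont (by simpa using hc)
                    · rw [hgd] at hc
                      rw [← hWs]
                      omega
                · obtain ⟨v, hvb, hv⟩ := hP3 i hi (by
                    rcases eq_or_lt_of_le hle with heq2 | hlt
                    · exact absurd (by rw [heq2]; exact rfl) heq
                    · omega)
                  exact ⟨v, hvb, by rw [PySem.Dict.get?_insert, if_neg heq]; exact hv⟩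
              · intro t v hv
                rw [PySem.Dict.get?_insert] at hv
                by_cases heq : t = (r + pvDR nd * (a+1), c + pvDC nd * (a+1), nd)
                · rw [if_pos heq] at hv
                  simp only [Option.some.injEq] at hv
                  refine Or.inr ⟨a + 1, ⟨by omega, hmn, by push_cast at hmx; omega, hallS⟩,
                    by rw [heq]; exact rfl, by rw [← hv]⟩
                · rw [if_neg heq] at hv; exact Or.inl hv
              · intro t v hv
                by_cases heq : t = (r + pvDR nd * (a+1), c + pvDC nd * (a+1), nd)
                · have hv' : D0.get? (r + pvDR nd * (a+1), c + pvDC nd * (a+1), nd) = some v := by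
                    rw [← heq]; exact hv
                  have hcont : D0.contains (r + pvDR nd * (a+1), c + pvDC nd * (a+1), nd) = true := by
                    rw [PySem.Dict.contains_eq_isSome_get?, hv']; rfl
                  have hgd : D0.getD (r + pvDR nd * (a+1), c + pvDC nd * (a+1), nd) 0 = v := by
                    rw [PySem.Dict.getD_eq_get?_getD, hv']; rfl
                  rcases hcond with hc | hc
                  · exact absurd hcont (by simpa using hc)
                  · rw [hgd] at hc
                    refine ⟨base + pvWsum g r c (pvDR nd) (pvDC nd) (a + 1).toNat, by
                      rw [← hWs]; omega, by rw [heq, PySem.Dict.get?_insert_self]⟩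
                · exact ⟨v, le_rfl, by rw [PySem.Dict.get?_insert, if_neg heq]; exact hv⟩
              · intro hnd0
                exact PySem.Dict.nodup_keys_insert _ _ _ hnd0
            · have hbody : pvStepB g (g.length : Int) ((g.headD []).length : Int) mn r c base nd
                  (pvDR nd) (pvDC nd) (false, pvWsum g r c (pvDR nd) (pvDC nd) a.toNat, D0) (a + 1) =
                  (false, pvWsum g r c (pvDR nd) (pvDC nd) (a + 1).toNat, D0) := by
                show (if (false : Bool) = true then _ else
                  if 0 ≤ r + pvDR nd * (a+1) ∧ r + pvDR nd * (a+1) < (g.length : Int) ∧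
                      0 ≤ c + pvDC nd * (a+1) ∧ c + pvDC nd * (a+1) < ((g.headD []).length : Int) then
                    if mn ≤ a + 1 then
                      if ¬ D0.contains (r + pvDR nd * (a+1), c + pvDC nd * (a+1), nd) = true ∨
                          base + (pvWsum g r c (pvDR nd) (pvDC nd) a.toNat +
                            pvCell g (r + pvDR nd * (a + 1)) (c + pvDC nd * (a + 1))) <
                            D0.getD (r + pvDR nd * (a+1), c + pvDC nd * (a+1), nd) 0 then
                        (false, pvWsum g r c (pvDR nd) (pvDC nd) a.toNat +
                          pvCell g (r + pvDR nd * (a + 1)) (c + pvDC nd * (a + 1)),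
                          D0.insert (r + pvDR nd * (a+1), c + pvDC nd * (a+1), nd)
                            (base + (pvWsum g r c (pvDR nd) (pvDC nd) a.toNat +
                              pvCell g (r + pvDR nd * (a + 1)) (c + pvDC nd * (a + 1)))))
                      else (false, pvWsum g r c (pvDR nd) (pvDC nd) a.toNat +
                        pvCell g (r + pvDR nd * (a + 1)) (c + pvDC nd * (a + 1)), D0)
                    else (false, pvWsum g r c (pvDR nd) (pvDC nd) a.toNat +
                      pvCell g (r + pvDR nd * (a + 1)) (c + pvDC nd * (a + 1)), D0)
                  else (true, pvWsum g r c (pvDR nd) (pvDC nd) a.toNat, D0)) = _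
                rw [if_neg (by simp), if_pos hbprop, if_pos hmn, if_neg hcond, hWs]
              push Not at hcond
              obtain ⟨hcont, hge⟩ := hcond
              refine ⟨false, _, D0, hbody, Or.inl ⟨rfl, hallS, rfl⟩, ?_,
                fun t v hv => Or.inl hv, fun t v hv => ⟨v, le_rfl, hv⟩, fun h => h⟩
              intro i hi hle
              rcases eq_or_lt_of_le hle with rfl | hlt
              · have hcont' : (D0.get? (pvTgt r c nd (a+1))).isSome = true := by
                  rw [← PySem.Dict.contains_eq_isSome_get?]
                  simpa using hcont
                rcases hv : D0.get? (pvTgt r c nd (a+1)) with _ | v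
                · rw [hv] at hcont'; cases hcont'
                · have hgd : D0.getD (r + pvDR nd * (a+1), c + pvDC nd * (a+1), nd) 0 = v := by
                    rw [PySem.Dict.getD_eq_get?_getD, show D0.get? (r + pvDR nd * (a+1), c + pvDC nd * (a+1), nd) = some v from hv]; rfl
                  refine ⟨v, ?_, hv ▸ rfl⟩
                  rw [hgd] at hge
                  rw [← hWs]
                  omega
              · exact hP3 i hi (by omega)
          · have hbody : pvStepB g (g.length : Int) ((g.headD []).length : Int) mn r c base nd
                (pvDR nd) (pvDC nd) (false, pvWsum g r c (pvDR nd) (pvDC nd) a.toNat, D0) (a + 1) =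
                (false, pvWsum g r c (pvDR nd) (pvDC nd) (a + 1).toNat, D0) := by
              show (if (false : Bool) = true then _ else
                if 0 ≤ r + pvDR nd * (a+1) ∧ r + pvDR nd * (a+1) < (g.length : Int) ∧
                    0 ≤ c + pvDC nd * (a+1) ∧ c + pvDC nd * (a+1) < ((g.headD []).length : Int) then
                  if mn ≤ a + 1 then
                    if ¬ D0.contains (r + pvDR nd * (a+1), c + pvDC nd * (a+1), nd) = true ∨
                        base + (pvWsum g r c (pvDR nd) (pvDC nd) a.toNat +
                          pvCell g (r + pvDR nd * (a + 1)) (c + pvDC nd * (a + 1))) <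
                          D0.getD (r + pvDR nd * (a+1), c + pvDC nd * (a+1), nd) 0 then
                      (false, pvWsum g r c (pvDR nd) (pvDC nd) a.toNat +
                        pvCell g (r + pvDR nd * (a + 1)) (c + pvDC nd * (a + 1)),
                        D0.insert (r + pvDR nd * (a+1), c + pvDC nd * (a+1), nd)
                          (base + (pvWsum g r c (pvDR nd) (pvDC nd) a.toNat +
                            pvCell g (r + pvDR nd * (a + 1)) (c + pvDC nd * (a + 1)))))
                    else (false, pvWsum g r c (pvDR nd) (pvDC nd) a.toNat +
                      pvCell g (r + pvDR nd * (a + 1)) (c + pvDC nd * (a + 1)), D0)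
                  else (false, pvWsum g r c (pvDR nd) (pvDC nd) a.toNat +
                    pvCell g (r + pvDR nd * (a + 1)) (c + pvDC nd * (a + 1)), D0)
                else (true, pvWsum g r c (pvDR nd) (pvDC nd) a.toNat, D0)) = _
              rw [if_neg (by simp), if_pos hbprop, if_neg hmn, hWs]
            refine ⟨false, _, D0, hbody, Or.inl ⟨rfl, hallS, rfl⟩, ?_,
              fun t v hv => Or.inl hv, fun t v hv => ⟨v, le_rfl, hv⟩, fun h => h⟩
            intro i hi hle
            rcases eq_or_lt_of_le hle with rfl | hlt
            · exact absurd hi.2.1 hmn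
            · exact hP3 i hi (by omega)
        · have hbody : pvStepB g (g.length : Int) ((g.headD []).length : Int) mn r c base nd
              (pvDR nd) (pvDC nd) (false, pvWsum g r c (pvDR nd) (pvDC nd) a.toNat, D0) (a + 1) =
              (true, pvWsum g r c (pvDR nd) (pvDC nd) a.toNat, D0) := by
            show (if (false : Bool) = true then _ else
              if 0 ≤ r + pvDR nd * (a+1) ∧ r + pvDR nd * (a+1) < (g.length : Int) ∧
                  0 ≤ c + pvDC nd * (a+1) ∧ c + pvDC nd * (a+1) < ((g.headD []).length : Int) then
                if mn ≤ a + 1 then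
                  if ¬ D0.contains (r + pvDR nd * (a+1), c + pvDC nd * (a+1), nd) = true ∨
                      base + (pvWsum g r c (pvDR nd) (pvDC nd) a.toNat +
                        pvCell g (r + pvDR nd * (a + 1)) (c + pvDC nd * (a + 1))) <
                        D0.getD (r + pvDR nd * (a+1), c + pvDC nd * (a+1), nd) 0 then
                    (false, pvWsum g r c (pvDR nd) (pvDC nd) a.toNat +
                      pvCell g (r + pvDR nd * (a + 1)) (c + pvDC nd * (a + 1)),
                      D0.insert (r + pvDR nd * (a+1), c + pvDC nd * (a+1), nd)
                        (base + (pvWsum g r c (pvDR nd) (pvDC nd) a.toNat +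
                          pvCell g (r + pvDR nd * (a + 1)) (c + pvDC nd * (a + 1)))))
                  else (false, pvWsum g r c (pvDR nd) (pvDC nd) a.toNat +
                    pvCell g (r + pvDR nd * (a + 1)) (c + pvDC nd * (a + 1)), D0)
                else (false, pvWsum g r c (pvDR nd) (pvDC nd) a.toNat +
                  pvCell g (r + pvDR nd * (a + 1)) (c + pvDC nd * (a + 1)), D0)
              else (true, pvWsum g r c (pvDR nd) (pvDC nd) a.toNat, D0)) = _
            rw [if_neg (by simp), if_neg (show ¬ ((0:Int) ≤ r + pvDR nd * (a+1) ∧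
              r + pvDR nd * (a+1) < (g.length : Int) ∧ 0 ≤ c + pvDC nd * (a+1) ∧
              c + pvDC nd * (a+1) < ((g.headD []).length : Int)) from hb)]
          refine ⟨true, _, D0, hbody, Or.inr ⟨rfl, a + 1, by omega, le_rfl, hb⟩, ?_,
            fun t v hv => Or.inl hv, fun t v hv => ⟨v, le_rfl, hv⟩, fun h => h⟩
          intro i hi hle
          rcases eq_or_lt_of_le hle with rfl | hlt
          · exact absurd (hi.2.2.2 (a+1) hi.1 le_rfl) hb
          · exact hP3 i hi (by omega)
    obtain ⟨stop1, h1, D1, hbody, hH1, hP31, hnew1, hmono1, hnd1⟩ := hstep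
    rw [hbody]
    have hrec := ih (a + 1) h1 stop1 D1 (by omega) (by push_cast at hmx ⊢; omega) hH1 hP31
    obtain ⟨r1, r2, r3, r4⟩ := hrec
    refine ⟨?_, ?_, ?_, fun h => r4 (hnd1 h)⟩
    · intro i hi hle
      exact r1 i hi (by push_cast at hle ⊢; omega)
    · intro t v hv
      rcases r2 t v hv with h | h
      · exact hnew1 t v h
      · exact Or.inr h
    · intro t v hv
      obtain ⟨v1, hv1, hv1b⟩ := hmono1 t v hv
      obtain ⟨v2, hv2, hv2b⟩ := r3 t v1 hv1b
      exact ⟨v2, by omega, hv2b⟩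

theorem pvScanBSpec (g : List (List Int)) (mn mx base r c nd : Int)
    (D : PySem.Dict (Int × Int × Int) Int) :
    (∀ i : Int, pvEdgeD g mn mx r c nd i →
      ∃ v, v ≤ base + pvWsum g r c (pvDR nd) (pvDC nd) i.toNat ∧
        (((PySem.List.pyRange 1 (mx + 1) 1).foldl
          (pvStepB g (g.length : Int) ((g.headD []).length : Int) mn r c base nd (pvDR nd) (pvDC nd))
          (false, 0, D)).2.2).get? (pvTgt r c nd i) = some v) ∧
    (∀ t v, (((PySem.List.pyRange 1 (mx + 1) 1).foldl
          (pvStepB g (g.length : Int) ((g.headD []).length : Int) mn r c base nd (pvDR nd) (pvDC nd))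
          (false, 0, D)).2.2).get? t = some v →
        D.get? t = some v ∨ ∃ i, pvEdgeD g mn mx r c nd i ∧ t = pvTgt r c nd i ∧
          v = base + pvWsum g r c (pvDR nd) (pvDC nd) i.toNat) ∧
    (∀ t v, D.get? t = some v →
      ∃ v', v' ≤ v ∧ (((PySem.List.pyRange 1 (mx + 1) 1).foldl
          (pvStepB g (g.length : Int) ((g.headD []).length : Int) mn r c base nd (pvDR nd) (pvDC nd))
          (false, 0, D)).2.2).get? t = some v') ∧
    (D.keys.Nodup → (((PySem.List.pyRange 1 (mx + 1) 1).foldl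
          (pvStepB g (g.length : Int) ((g.headD []).length : Int) mn r c base nd (pvDR nd) (pvDC nd))
          (false, 0, D)).2.2).keys.Nodup) := by
  rcases le_or_gt 0 mx with hmx | hmx
  · have hrange : PySem.List.pyRange 1 (mx + 1) 1 =
        PySem.List.pyRange (0 + 1) (0 + 1 + (mx.toNat : Int)) 1 := by
      congr 1 <;> omega
    have haux := pvScanBAux g mn mx base r c nd (g.length : Int) ((g.headD []).length : Int)
      rfl rfl mx.toNat 0 0 false D le_rfl (by omega)
      (Or.inl ⟨rfl, fun k hk1 hk2 => absurd (le_trans hk1 hk2) (by omega), rfl⟩)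
      (fun i hi hle => absurd (le_trans hi.1 hle) (by omega))
    obtain ⟨a1, a2, a3, a4⟩ := haux
    rw [hrange]
    refine ⟨?_, a2, a3, a4⟩
    intro i hi
    exact a1 i hi (by have := hi.2.2.1; omega)
  · have hrange : PySem.List.pyRange 1 (mx + 1) 1 = [] :=
      PySem.List.pyRange_one_eq_nil (by omega)
    rw [hrange]
    simp only [List.foldl_nil]
    refine ⟨?_, fun t v hv => Or.inl hv, fun t v hv => ⟨v, le_rfl, hv⟩, fun h => h⟩
    intro i hi
    exact absurd (le_trans hi.1 hi.2.2.1) (by omega)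

theorem pvItemBSpec (g : List (List Int)) (mn mx r c dd base : Int)
    (D : PySem.Dict (Int × Int × Int) Int) :
    (∀ t w, pvEdge g mn mx (r, c, dd) t w →
      ∃ v, v ≤ base + w ∧
        (pvItemB g (g.length : Int) ((g.headD []).length : Int) mn mx D ((r, c, dd), base)).get? t = some v) ∧
    (∀ t v, (pvItemB g (g.length : Int) ((g.headD []).length : Int) mn mx D ((r, c, dd), base)).get? t = some v →
        D.get? t = some v ∨ ∃ w, pvEdge g mn mx (r, c, dd) t w ∧ v = base + w) ∧
    (∀ t v, D.get? t = some v →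
      ∃ v', v' ≤ v ∧ (pvItemB g (g.length : Int) ((g.headD []).length : Int) mn mx D ((r, c, dd), base)).get? t = some v') ∧
    (D.keys.Nodup →
      (pvItemB g (g.length : Int) ((g.headD []).length : Int) mn mx D ((r, c, dd), base)).keys.Nodup) := by
  have hrange : PySem.List.pyRange 0 4 1 = [0, 1, 2, 3] := by decide
  have hstage : ∀ (nd : Int), nd = 0 ∨ nd = 1 ∨ nd = 2 ∨ nd = 3 →
      ∀ D1 : PySem.Dict (Int × Int × Int) Int,
      (∀ t v, ((fun dist ndx => if ndx = dd ∨ PySem.Int.mod (ndx + 2) 4 = dd then dist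
        else ((PySem.List.pyRange 1 (mx + 1) 1).foldl
          (pvStepB g (g.length : Int) ((g.headD []).length : Int) mn r c base ndx
            (pvDR ndx) (pvDC ndx)) (false, 0, dist)).2.2) D1 nd).get? t = some v →
        D1.get? t = some v ∨ ∃ w, pvEdge g mn mx (r, c, dd) t w ∧ v = base + w) ∧
      (∀ t v, D1.get? t = some v → ∃ v', v' ≤ v ∧
        ((fun dist ndx => if ndx = dd ∨ PySem.Int.mod (ndx + 2) 4 = dd then dist
        else ((PySem.List.pyRange 1 (mx + 1) 1).foldl
          (pvStepB g (g.length : Int) ((g.headD []).length : Int) mn r c base ndx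
            (pvDR ndx) (pvDC ndx)) (false, 0, dist)).2.2) D1 nd).get? t = some v') ∧
      (pvAllowed dd nd → ∀ i : Int, pvEdgeD g mn mx r c nd i →
        ∃ v, v ≤ base + pvWsum g r c (pvDR nd) (pvDC nd) i.toNat ∧
          ((fun dist ndx => if ndx = dd ∨ PySem.Int.mod (ndx + 2) 4 = dd then dist
        else ((PySem.List.pyRange 1 (mx + 1) 1).foldl
          (pvStepB g (g.length : Int) ((g.headD []).length : Int) mn r c base ndx
            (pvDR ndx) (pvDC ndx)) (false, 0, dist)).2.2) D1 nd).get? (pvTgt r c nd i) = some v) ∧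
      (D1.keys.Nodup →
        ((fun dist ndx => if ndx = dd ∨ PySem.Int.mod (ndx + 2) 4 = dd then dist
        else ((PySem.List.pyRange 1 (mx + 1) 1).foldl
          (pvStepB g (g.length : Int) ((g.headD []).length : Int) mn r c base ndx
            (pvDR ndx) (pvDC ndx)) (false, 0, dist)).2.2) D1 nd).keys.Nodup) := by
    intro nd hnd D1
    by_cases hguard : nd = dd ∨ PySem.Int.mod (nd + 2) 4 = dd
    · simp only [if_pos hguard]
      exact ⟨fun t v hv => Or.inl hv, fun t v hv => ⟨v, le_rfl, hv⟩,
        fun hall => absurd hguard hall.2, fun h => h⟩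
    · simp only [if_neg hguard]
      obtain ⟨s1, s2, s3, s4⟩ := pvScanBSpec g mn mx base r c nd D1
      refine ⟨?_, s3, fun _ i hi => s1 i hi, s4⟩
      intro t v hv
      rcases s2 t v hv with h | ⟨i, hi, rfl, rfl⟩
      · exact Or.inl h
      · exact Or.inr ⟨pvWsum g r c (pvDR nd) (pvDC nd) i.toNat,
          ⟨nd, i, ⟨hnd, hguard⟩, hi, rfl, rfl⟩, rfl⟩
  have hitem : pvItemB g (g.length : Int) ((g.headD []).length : Int) mn mx D ((r, c, dd), base) =
      [(0 : Int), 1, 2, 3].foldl (fun dist ndx =>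
        if ndx = dd ∨ PySem.Int.mod (ndx + 2) 4 = dd then dist
        else ((PySem.List.pyRange 1 (mx + 1) 1).foldl
          (pvStepB g (g.length : Int) ((g.headD []).length : Int) mn r c base ndx
            (pvDR ndx) (pvDC ndx)) (false, 0, dist)).2.2) D := by
    unfold pvItemB
    rw [hrange]
    exact rfl
  rw [hitem]
  simp only [List.foldl_cons, List.foldl_nil]
  obtain ⟨n1, m1, rel1, k1⟩ := hstage 0 (by tauto) D
  set D1 := (fun dist ndx => if ndx = dd ∨ PySem.Int.mod (ndx + 2) 4 = dd then dist
        else ((PySem.List.pyRange 1 (mx + 1) 1).foldl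
          (pvStepB g (g.length : Int) ((g.headD []).length : Int) mn r c base ndx
            (pvDR ndx) (pvDC ndx)) (false, 0, dist)).2.2) D 0 with hD1
  obtain ⟨n2, m2, rel2, k2⟩ := hstage 1 (by tauto) D1
  set D2 := (fun dist ndx => if ndx = dd ∨ PySem.Int.mod (ndx + 2) 4 = dd then dist
        else ((PySem.List.pyRange 1 (mx + 1) 1).foldl
          (pvStepB g (g.length : Int) ((g.headD []).length : Int) mn r c base ndx
            (pvDR ndx) (pvDC ndx)) (false, 0, dist)).2.2) D1 1 with hD2
  obtain ⟨n3, m3, rel3, k3⟩ := hstage 2 (by tauto) D2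
  set D3 := (fun dist ndx => if ndx = dd ∨ PySem.Int.mod (ndx + 2) 4 = dd then dist
        else ((PySem.List.pyRange 1 (mx + 1) 1).foldl
          (pvStepB g (g.length : Int) ((g.headD []).length : Int) mn r c base ndx
            (pvDR ndx) (pvDC ndx)) (false, 0, dist)).2.2) D2 2 with hD3
  obtain ⟨n4, m4, rel4, k4⟩ := hstage 3 (by tauto) D3
  refine ⟨?_, ?_, ?_, ?_⟩
  · intro t w hE
    obtain ⟨nd, i, hall, hD, rfl, rfl⟩ := hE
    dsimp only
    rcases hall.1 with rfl | rfl | rfl | rfl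
    · obtain ⟨v, hvb, hv⟩ := rel1 hall i hD
      obtain ⟨v2, hv2, hv2b⟩ := m2 _ v hv
      obtain ⟨v3, hv3, hv3b⟩ := m3 _ v2 hv2b
      obtain ⟨v4, hv4, hv4b⟩ := m4 _ v3 hv3b
      exact ⟨v4, by omega, hv4b⟩
    · obtain ⟨v, hvb, hv⟩ := rel2 hall i hD
      obtain ⟨v3, hv3, hv3b⟩ := m3 _ v hv
      obtain ⟨v4, hv4, hv4b⟩ := m4 _ v3 hv3b
      exact ⟨v4, by omega, hv4b⟩
    · obtain ⟨v, hvb, hv⟩ := rel3 hall i hD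
      obtain ⟨v4, hv4, hv4b⟩ := m4 _ v hv
      exact ⟨v4, by omega, hv4b⟩
    · obtain ⟨v, hvb, hv⟩ := rel4 hall i hD
      exact ⟨v, hvb, hv⟩
  · intro t v hv
    rcases n4 t v hv with h | h
    · rcases n3 t v h with h2 | h2
      · rcases n2 t v h2 with h3 | h3
        · rcases n1 t v h3 with h4 | h4
          · exact Or.inl h4
          · exact Or.inr h4
        · exact Or.inr h3
      · exact Or.inr h2
    · exact Or.inr h
  · intro t v hv
    obtain ⟨v1, hv1, hv1b⟩ := m1 t v hv
    obtain ⟨v2, hv2, hv2b⟩ := m2 t v1 hv1b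
    obtain ⟨v3, hv3, hv3b⟩ := m3 t v2 hv2b
    obtain ⟨v4, hv4, hv4b⟩ := m4 t v3 hv3b
    exact ⟨v4, by omega, hv4b⟩
  · intro h
    exact k4 (k3 (k2 (k1 h)))

theorem pvItemsFold (g : List (List Int)) (mn mx : Int)
    (its : List ((Int × Int × Int) × Int)) :
    ∀ D : PySem.Dict (Int × Int × Int) Int,
    (∀ t v, (its.foldl (pvItemB g (g.length : Int) ((g.headD []).length : Int) mn mx) D).get? t = some v →
        D.get? t = some v ∨ ∃ it ∈ its, ∃ w, pvEdge g mn mx it.1 t w ∧ v = it.2 + w) ∧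
    (∀ t v, D.get? t = some v → ∃ v', v' ≤ v ∧
      (its.foldl (pvItemB g (g.length : Int) ((g.headD []).length : Int) mn mx) D).get? t = some v') ∧
    (∀ it ∈ its, ∀ t w, pvEdge g mn mx it.1 t w →
      ∃ v, v ≤ it.2 + w ∧
        (its.foldl (pvItemB g (g.length : Int) ((g.headD []).length : Int) mn mx) D).get? t = some v) ∧
    (D.keys.Nodup →
      (its.foldl (pvItemB g (g.length : Int) ((g.headD []).length : Int) mn mx) D).keys.Nodup) := by
  induction its with
  | nil =>
    intro D
    simp only [List.foldl_nil]
    exact ⟨fun t v hv => Or.inl hv, fun t v hv => ⟨v, le_rfl, hv⟩, fun it hit => absurd hit (by simp),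
      fun h => h⟩
  | cons it rest ih =>
    intro D
    obtain ⟨⟨r, c, dd⟩, base⟩ := it
    simp only [List.foldl_cons]
    obtain ⟨i1, i2, i3, i4⟩ := pvItemBSpec g mn mx r c dd base D
    obtain ⟨r1, r2, r3, r4⟩ := ih (pvItemB g (g.length : Int) ((g.headD []).length : Int) mn mx D ((r, c, dd), base))
    refine ⟨?_, ?_, ?_, fun h => r4 (i4 h)⟩
    · intro t v hv
      rcases r1 t v hv with h | ⟨it2, hit2, w, hE, hveq⟩
      · rcases i2 t v h with h2 | ⟨w, hE, hveq⟩
        · exact Or.inl h2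
        · exact Or.inr ⟨((r, c, dd), base), by simp, w, hE, hveq⟩
      · exact Or.inr ⟨it2, List.mem_cons_of_mem _ hit2, w, hE, hveq⟩
    · intro t v hv
      obtain ⟨v1, hv1, hv1b⟩ := i3 t v hv
      obtain ⟨v2, hv2, hv2b⟩ := r2 t v1 hv1b
      exact ⟨v2, by omega, hv2b⟩
    · intro it2 hit2 t w hE
      rcases List.mem_cons.mp hit2 with rfl | hit2'
      · obtain ⟨v, hvb, hv⟩ := i1 t w hE
        obtain ⟨v2, hv2, hv2b⟩ := r2 t v hv
        exact ⟨v2, by omega, hv2b⟩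
      · exact r3 it2 hit2' t w hE

def pvDInvB (g : List (List Int)) (mn mx : Int) (D : PySem.Dict (Int × Int × Int) Int) : Prop :=
  D.keys.Nodup ∧ (∀ t v, D.get? t = some v → pvReach g mn mx t v) ∧
    (∃ v, v ≤ 0 ∧ D.get? (0, 0, -1) = some v)

def pvCovB (g : List (List Int)) (mn mx : Int) (j : Nat)
    (D : PySem.Dict (Int × Int × Int) Int) : Prop :=
  ∀ t cc (l : List (Int × Int × Int)), pvWalk g mn mx (0, 0, -1) l t cc → l.length ≤ j →
    ∃ v, v ≤ cc ∧ D.get? t = some v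

theorem pvRoundBStep (g : List (List Int)) (mn mx : Int)
    (D : PySem.Dict (Int × Int × Int) Int) (hinv : pvDInvB g mn mx D)
    (j : Nat) (hcov : pvCovB g mn mx j D) :
    pvDInvB g mn mx (pvRoundB g (g.length : Int) ((g.headD []).length : Int) mn mx D) ∧
    pvCovB g mn mx (j + 1) (pvRoundB g (g.length : Int) ((g.headD []).length : Int) mn mx D) := by
  obtain ⟨f1, f2, f3, f4⟩ := pvItemsFold g mn mx D.items D
  have hround : pvRoundB g (g.length : Int) ((g.headD []).length : Int) mn mx D =
      D.items.foldl (pvItemB g (g.length : Int) ((g.headD []).length : Int) mn mx) D := rfl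
  rw [hround]
  obtain ⟨hnd, hsound, v0, hv0le, hv0⟩ := hinv
  have hinv' : pvDInvB g mn mx (D.items.foldl (pvItemB g (g.length : Int) ((g.headD []).length : Int) mn mx) D) := by
    refine ⟨f4 hnd, ?_, ?_⟩
    · intro t v hv
      rcases f1 t v hv with h | ⟨it, hit, w, hE, rfl⟩
      · exact hsound t v h
      · have hbase : D.get? it.1 = some it.2 :=
          PySem.Dict.get?_of_mem_items D (show (it.1, it.2) ∈ D.items from hit) hnd
        exact pvReachStep g mn mx (hsound it.1 it.2 hbase) hE
    · obtain ⟨v', hv', hv'b⟩ := f2 (0, 0, -1) v0 hv0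
      exact ⟨v', by omega, hv'b⟩
  refine ⟨hinv', ?_⟩
  intro t cc l hw hlen
  rcases List.eq_nil_or_concat l with rfl | ⟨l', x, rfl⟩
  · cases hw
    obtain ⟨-, -, v', hv', hv'b⟩ := hinv'
    exact ⟨v', hv', hv'b⟩
  · rw [List.concat_eq_append] at hw
    obtain ⟨rfl, m, c1, w, hw1, hE, rfl⟩ := pvWalkSnoc g mn mx hw
    obtain ⟨v, hvle, hv⟩ := hcov m c1 l' hw1 (by simp at hlen; omega)
    have hit : (m, v) ∈ D.items := PySem.Dict.mem_items_of_get?_eq_some D hv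
    obtain ⟨v2, hv2le, hv2⟩ := f3 (m, v) hit t w hE
    exact ⟨v2, by omega, hv2⟩

theorem pvRoundsBIter (g : List (List Int)) (mn mx : Int) (l : List Int) :
    ∀ (j : Nat) (D : PySem.Dict (Int × Int × Int) Int), pvDInvB g mn mx D → pvCovB g mn mx j D →
    pvDInvB g mn mx (l.foldl (fun D _ =>
      pvRoundB g (g.length : Int) ((g.headD []).length : Int) mn mx D) D) ∧
    pvCovB g mn mx (j + l.length) (l.foldl (fun D _ =>
      pvRoundB g (g.length : Int) ((g.headD []).length : Int) mn mx D) D) := by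
  induction l with
  | nil =>
    intro j D h1 h2
    simpa using ⟨h1, h2⟩
  | cons x rest ih =>
    intro j D h1 h2
    obtain ⟨h1', h2'⟩ := pvRoundBStep g mn mx D h1 j h2
    obtain ⟨h1'', h2''⟩ := ih (j + 1) _ h1' h2'
    simp only [List.foldl_cons, List.length_cons]
    exact ⟨h1'', by
      have : j + 1 + rest.length = j + (rest.length + 1) := by omega
      rw [← this]
      exact h2''⟩

theorem pvWalkMemReach (g : List (List Int)) (mn mx : Int)
    {l : List (Int × Int × Int)} {t : Int × Int × Int} {c : Int}
    (hw : pvWalk g mn mx (0, 0, -1) l t c) :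
    ∀ x ∈ l, ∃ cx, pvReach g mn mx x cx := by
  intro x hx
  obtain ⟨l1, l2, rfl⟩ := List.append_of_mem hx
  rw [show l1 ++ x :: l2 = (l1 ++ [x]) ++ l2 by simp] at hw
  obtain ⟨m, c1, c2, hw1, hw2, rfl⟩ := pvWalkSplit g mn mx hw
  have hm := pvWalkLast g mn mx hw1
  subst hm
  exact ⟨c1, ⟨l1 ++ [m], hw1⟩⟩

-- the dict built by B's rounds
def pvDistB (d : String) (mn mx : Int) : PySem.Dict (Int × Int × Int) Int :=
  (PySem.List.pyRange 0 (4 * ((pvParse d).length : Int) * (((pvParse d).headD []).length : Int) + 1) 1).foldl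
    (fun dist _ => pvRoundB (pvParse d) ((pvParse d).length : Int)
      (((pvParse d).headD []).length : Int) mn mx dist)
    (PySem.Dict.ofList [(((0 : Int), (0 : Int), (-1 : Int)), (0 : Int))])

theorem pvSolveBEq (d : String) (mn mx : Int) :
    solve_alt d mn mx =
      if ((pvParse d).length : Int) = 1 ∧ ((((pvParse d).headD []).length : Int)) = 1 then some 0
      else
        PySem.List.min?
          ((PySem.List.pyRange 0 4 1).foldl
            (fun acc nd =>
              if (pvDistB d mn mx).contains (((pvParse d).length : Int) - 1,
                  (((pvParse d).headD []).length : Int) - 1, nd) then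
                acc ++ [(pvDistB d mn mx).getD (((pvParse d).length : Int) - 1,
                  (((pvParse d).headD []).length : Int) - 1, nd) 0]
              else acc) [])
          (fun x => x) := by
  have hcols : (if pvParse d = [] then (0 : Int) else (((pvParse d).headD []).length : Int)) =
      (((pvParse d).headD []).length : Int) := by
    split
    · rename_i h; rw [h]; rfl
    · rfl
  show (if ((pvParse d).length : Int) = 1 ∧
      (if pvParse d = [] then (0 : Int) else (((pvParse d).headD []).length : Int)) = 1 then some 0
    else
      PySem.List.min?
        ((PySem.List.pyRange 0 4 1).foldl
          (fun acc nd =>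
            if ((PySem.List.pyRange 0 (4 * ((pvParse d).length : Int) *
                (if pvParse d = [] then (0 : Int) else (((pvParse d).headD []).length : Int)) + 1) 1).foldl
                (fun dist _ => pvRoundB (pvParse d) ((pvParse d).length : Int)
                  (if pvParse d = [] then (0 : Int) else (((pvParse d).headD []).length : Int)) mn mx dist)
                (PySem.Dict.ofList [(((0 : Int), (0 : Int), (-1 : Int)), (0 : Int))])).contains
                (((pvParse d).length : Int) - 1,
                 (if pvParse d = [] then (0 : Int) else (((pvParse d).headD []).length : Int)) - 1, nd) then
              acc ++ [((PySem.List.pyRange 0 (4 * ((pvParse d).length : Int) *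
                (if pvParse d = [] then (0 : Int) else (((pvParse d).headD []).length : Int)) + 1) 1).foldl
                (fun dist _ => pvRoundB (pvParse d) ((pvParse d).length : Int)
                  (if pvParse d = [] then (0 : Int) else (((pvParse d).headD []).length : Int)) mn mx dist)
                (PySem.Dict.ofList [(((0 : Int), (0 : Int), (-1 : Int)), (0 : Int))])).getD
                (((pvParse d).length : Int) - 1,
                 (if pvParse d = [] then (0 : Int) else (((pvParse d).headD []).length : Int)) - 1, nd) 0]
            else acc) [])
        (fun x => x)) = _
  rw [hcols]
  rfl

theorem pvDistBProps (d : String) (mn mx : Int) :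
    (∀ t v, (pvDistB d mn mx).get? t = some v → pvReach (pvParse d) mn mx t v) ∧
    ((∀ r c, 0 ≤ pvCell (pvParse d) r c) → ∀ t cc, pvReach (pvParse d) mn mx t cc →
      ∃ v, v ≤ cc ∧ (pvDistB d mn mx).get? t = some v) := by
  have hinit : PySem.Dict.ofList [(((0 : Int), (0 : Int), (-1 : Int)), (0 : Int))] =
      PySem.Dict.empty.insert (0, 0, -1) 0 := by rfl
  have hinv0 : pvDInvB (pvParse d) mn mx
      (PySem.Dict.ofList [(((0 : Int), (0 : Int), (-1 : Int)), (0 : Int))]) := by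
    rw [hinit]
    refine ⟨?_, ?_, 0, le_rfl, PySem.Dict.get?_insert_self _ _ _⟩
    · exact PySem.Dict.nodup_keys_insert _ _ _ (by simp [PySem.Dict.keys_empty])
    · intro t v hv
      rw [PySem.Dict.get?_insert] at hv
      by_cases ht : t = ((0 : Int), (0 : Int), (-1 : Int))
      · rw [if_pos ht] at hv
        simp only [Option.some.injEq] at hv
        rw [ht, ← hv]
        exact pvReachNil (pvParse d) mn mx
      · rw [if_neg ht, PySem.Dict.get?_empty] at hv
        cases hv
  have hcov0 : pvCovB (pvParse d) mn mx 0
      (PySem.Dict.ofList [(((0 : Int), (0 : Int), (-1 : Int)), (0 : Int))]) := by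
    intro t cc l hw hlen
    have hnil : l = [] := List.eq_nil_of_length_eq_zero (by omega)
    subst hnil
    cases hw
    exact ⟨0, le_rfl, by rw [hinit]; exact PySem.Dict.get?_insert_self _ _ _⟩
  have hiter := pvRoundsBIter (pvParse d) mn mx
    (PySem.List.pyRange 0 (4 * ((pvParse d).length : Int) *
      (((pvParse d).headD []).length : Int) + 1) 1) 0
    (PySem.Dict.ofList [(((0 : Int), (0 : Int), (-1 : Int)), (0 : Int))]) hinv0 hcov0
  obtain ⟨hinvF, hcovF⟩ := hiter
  have hdist : pvDistB d mn mx =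
      (PySem.List.pyRange 0 (4 * ((pvParse d).length : Int) *
        (((pvParse d).headD []).length : Int) + 1) 1).foldl
        (fun D _ => pvRoundB (pvParse d) ((pvParse d).length : Int)
          (((pvParse d).headD []).length : Int) mn mx D)
        (PySem.Dict.ofList [(((0 : Int), (0 : Int), (-1 : Int)), (0 : Int))]) := rfl
  have hNlen : (PySem.List.pyRange 0 (4 * ((pvParse d).length : Int) *
      (((pvParse d).headD []).length : Int) + 1) 1).length =
      4 * ((pvParse d).length * ((pvParse d).headD []).length) + 1 := by
    rw [PySem.List.length_pyRange_one]
    rw [show (4 * ((pvParse d).length : Int) * (((pvParse d).headD []).length : Int) + 1 - 0) =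
      ((4 * ((pvParse d).length * ((pvParse d).headD []).length) + 1 : ℕ) : ℤ) by push_cast; ring]
    exact Int.toNat_natCast _
  refine ⟨?_, ?_⟩
  · intro t v hv
    exact hinvF.2.1 t v (by rw [hdist] at hv; exact hv)
  · intro hg t cc hR
    obtain ⟨l, hw⟩ := hR
    obtain ⟨l', c', hw', hc'le, hnd⟩ := pvWalkCut (pvParse d) mn mx hg hw
    have hsub : ∀ x ∈ (0, 0, -1) :: l', x ∈ pvSpace (pvParse d) := by
      intro x hx
      rcases List.mem_cons.mp hx with rfl | hx'
      · exact pvMemSpace (pvParse d) mn mx (pvReachNil (pvParse d) mn mx)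
      · obtain ⟨cx, hcx⟩ := pvWalkMemReach (pvParse d) mn mx hw' x hx'
        exact pvMemSpace (pvParse d) mn mx hcx
    have hlenb : ((0, 0, -1) :: l').length ≤ (pvSpace (pvParse d)).card :=
      pvNodupLen (pvParse d) _ hnd hsub
    have hcard := pvSpaceCard (pvParse d)
    have hl'len : l'.length ≤ 4 * ((pvParse d).length * ((pvParse d).headD []).length) := by
      simp only [List.length_cons] at hlenb
      omega
    obtain ⟨v, hvle, hv⟩ := hcovF t c' l' hw' (by rw [hNlen]; omega)
    exact ⟨v, by omega, by rw [hdist]; exact hv⟩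

theorem pvSolveBSome (d : String) (mn mx : Int) (hpre : Pre_solve d mn mx)
    (hne : (pvGoalCosts (pvParse d) mn mx).Nonempty) :
    solve_alt d mn mx = some ((pvOpt (pvParse d) mn mx : Nat) : Int) := by
  have hg := pvCellNonneg d mn mx hpre
  obtain ⟨hsound, hcompl⟩ := pvDistBProps d mn mx
  have hoptmem : pvOpt (pvParse d) mn mx ∈ pvGoalCosts (pvParse d) mn mx := Nat.sInf_mem hne
  obtain ⟨tg, htg, hreachg⟩ := hoptmem
  rw [pvSolveBEq]
  by_cases h11 : ((pvParse d).length : Int) = 1 ∧ ((((pvParse d).headD []).length : Int)) = 1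
  · rw [if_pos h11]
    have h0 : (0 : Nat) ∈ pvGoalCosts (pvParse d) mn mx :=
      ⟨(0, 0, -1), ⟨show (0 : Int) = ((pvParse d).length : Int) - 1 by omega,
        show (0 : Int) = (((pvParse d).headD []).length : Int) - 1 by omega⟩, pvReachNil _ _ _⟩
    have : pvOpt (pvParse d) mn mx = 0 := Nat.le_zero.mp (Nat.sInf_le h0)
    rw [this]
    rfl
  · rw [if_neg h11]
    obtain ⟨tr, tc, td⟩ := tg
    obtain ⟨htr, htc⟩ := htg
    simp only at htr htc
    subst htr htc
    have htd : td = 0 ∨ td = 1 ∨ td = 2 ∨ td = 3 := by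
      rcases pvReachState (pvParse d) mn mx hreachg with heq | ⟨hd, _⟩
      · exfalso
        simp only [Prod.mk.injEq] at heq
        apply h11
        constructor <;> omega
      · exact hd
    -- the goal key td holds exactly the optimum
    obtain ⟨v, hvle, hv⟩ := hcompl hg _ _ hreachg
    have hvge : ((pvOpt (pvParse d) mn mx : Nat) : Int) ≤ v := by
      have hR := hsound _ v hv
      have hv0 : 0 ≤ v := pvReachNonneg (pvParse d) mn mx hg hR
      have hc : v.toNat ∈ pvGoalCosts (pvParse d) mn mx :=
        ⟨_, ⟨rfl, rfl⟩, by rw [show ((v.toNat : Nat) : Int) = v by omega]; exact hR⟩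
      have hsle : pvOpt (pvParse d) mn mx ≤ v.toNat := Nat.sInf_le hc
      omega
    have hveq : v = ((pvOpt (pvParse d) mn mx : Nat) : Int) := le_antisymm hvle hvge
    -- characterize the best list
    rw [PySem.List.foldl_append_if]
    rw [List.nil_append]
    have hrange4 : PySem.List.pyRange 0 4 1 = [0, 1, 2, 3] := by decide
    rw [hrange4]
    set R : Int := ((pvParse d).length : Int)
    set C : Int := (((pvParse d).headD []).length : Int)
    set DIST := pvDistB d mn mx
    have hbmem : ∀ y, y ∈ (([0, 1, 2, 3] : List Int).filter
          (fun nd => DIST.contains (R - 1, C - 1, nd))).map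
          (fun nd => DIST.getD (R - 1, C - 1, nd) 0) ↔
        ∃ nd, nd ∈ ([0, 1, 2, 3] : List Int) ∧ DIST.contains (R - 1, C - 1, nd) = true ∧
          y = DIST.getD (R - 1, C - 1, nd) 0 := by
      intro y
      simp only [List.mem_map, List.mem_filter]
      constructor
      · rintro ⟨nd, ⟨h1, h2⟩, rfl⟩
        exact ⟨nd, h1, h2, rfl⟩
      · rintro ⟨nd, h1, h2, rfl⟩
        exact ⟨nd, ⟨h1, h2⟩, rfl⟩
    have hinl : ((pvOpt (pvParse d) mn mx : Nat) : Int) ∈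
        (([0, 1, 2, 3] : List Int).filter (fun nd => DIST.contains (R - 1, C - 1, nd))).map
          (fun nd => DIST.getD (R - 1, C - 1, nd) 0) := by
      rw [hbmem]
      refine ⟨td, by rcases htd with rfl | rfl | rfl | rfl <;> simp, ?_, ?_⟩
      · rw [PySem.Dict.contains_eq_isSome_get?, hv]; rfl
      · rw [PySem.Dict.getD_eq_get?_getD, hv, hveq]; rfl
    have hall : ∀ y ∈ (([0, 1, 2, 3] : List Int).filter
          (fun nd => DIST.contains (R - 1, C - 1, nd))).map
          (fun nd => DIST.getD (R - 1, C - 1, nd) 0),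
        ((pvOpt (pvParse d) mn mx : Nat) : Int) ≤ y := by
      intro y hy
      rw [hbmem] at hy
      obtain ⟨nd, hnd4, hcont, rfl⟩ := hy
      have hcont' : (DIST.get? (R - 1, C - 1, nd)).isSome = true := by
        rw [← PySem.Dict.contains_eq_isSome_get?]; exact hcont
      rcases hvy : DIST.get? (R - 1, C - 1, nd) with _ | vy
      · rw [hvy] at hcont'; cases hcont'
      · have hgd : DIST.getD (R - 1, C - 1, nd) 0 = vy := by
          rw [PySem.Dict.getD_eq_get?_getD, hvy]; rfl
        rw [hgd]
        have hR := hsound _ vy hvy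
        have hv0 : 0 ≤ vy := pvReachNonneg (pvParse d) mn mx hg hR
        have hc : vy.toNat ∈ pvGoalCosts (pvParse d) mn mx :=
          ⟨_, ⟨rfl, rfl⟩, by rw [show ((vy.toNat : Nat) : Int) = vy by omega]; exact hR⟩
        have hsle : pvOpt (pvParse d) mn mx ≤ vy.toNat := Nat.sInf_le hc
        omega
    rcases hminr : PySem.List.min? ((([0, 1, 2, 3] : List Int).filter
        (fun nd => DIST.contains (R - 1, C - 1, nd))).map
        (fun nd => DIST.getD (R - 1, C - 1, nd) 0)) (fun x => x) with _ | mv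
    · exfalso
      rw [PySem.List.min?_eq_none_iff] at hminr
      rw [hminr] at hinl
      cases hinl
    · have hmvmem := PySem.List.min?_mem hminr
      have hmvmin := PySem.List.min?_isMin hminr
      have h1 := hall mv hmvmem
      have h2 := hmvmin _ hinl
      congr 1
      omega

theorem pvSolveBNone (d : String) (mn mx : Int) (hpre : Pre_solve d mn mx)
    (hno : ¬ (pvGoalCosts (pvParse d) mn mx).Nonempty) :
    solve_alt d mn mx = none := by
  have hg := pvCellNonneg d mn mx hpre
  obtain ⟨hsound, _⟩ := pvDistBProps d mn mx
  rw [pvSolveBEq]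
  by_cases h11 : ((pvParse d).length : Int) = 1 ∧ ((((pvParse d).headD []).length : Int)) = 1
  · exfalso
    exact hno ⟨0, (0, 0, -1), ⟨show (0 : Int) = ((pvParse d).length : Int) - 1 by omega,
      show (0 : Int) = (((pvParse d).headD []).length : Int) - 1 by omega⟩, pvReachNil _ _ _⟩
  · rw [if_neg h11]
    rw [PySem.List.foldl_append_if, List.nil_append]
    have hfilter : (PySem.List.pyRange 0 4 1).filter
        (fun nd => (pvDistB d mn mx).contains (((pvParse d).length : Int) - 1,
          (((pvParse d).headD []).length : Int) - 1, nd)) = [] := by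
      rw [List.filter_eq_nil_iff]
      intro nd hmem hcont
      have hcont' : ((pvDistB d mn mx).get? (((pvParse d).length : Int) - 1,
          (((pvParse d).headD []).length : Int) - 1, nd)).isSome = true := by
        rw [← PySem.Dict.contains_eq_isSome_get?]; exact hcont
      rcases hv : (pvDistB d mn mx).get? (((pvParse d).length : Int) - 1,
          (((pvParse d).headD []).length : Int) - 1, nd) with _ | v
      · rw [hv] at hcont'; cases hcont'
      · have hR := hsound _ v hv
        have hv0 : 0 ≤ v := pvReachNonneg (pvParse d) mn mx hg hR
        exact hno ⟨v.toNat, _, ⟨rfl, rfl⟩,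
          by rw [show ((v.toNat : Nat) : Int) = v by omega]; exact hR⟩
    rw [hfilter]
    rfl

-- ===== VERDICT (by name: the statement is the Claim_ definition above) =====
theorem solve_spec : Claim_equal_solve := by
  intro d mn mx hdom hpre
  unfold Spec_solve
  by_cases hne : (pvGoalCosts (pvParse d) mn mx).Nonempty
  · rw [pvSolveASome d mn mx hpre hne, pvSolveBSome d mn mx hpre hne]
  · rw [pvSolveANone d mn mx hpre hne, pvSolveBNone d mn mx hpre hne]
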